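-- pv_equiv track=rewrite | github.com/AlifSrSE/ProblemSolves | 1006E-militaryProblem.py | solve
-- ===== SOURCE A (Python) =====
-- def solve(p, u, k):
--     n = len(p) + 1
--     child_lists = [[] for _ in range(n)]
--     for i, parent in enumerate(p):
--         child_lists[parent - 1].append(i + 1)
--     for child_list in child_lists:
--         child_list.sort()
--
--     sequence = []
--     subtree_sizes = [0] * n
--     stack = [(0, False)]
--
--     while stack:
--         node, processed = stack.pop()
--         if not processed:
--             sequence.append(node)
--             stack.append((node, True))
--             for child in reversed(child_lists[node]):
--                 stack.append((child, False))
--         else: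
--             subtree_sizes[node] = 1
--             for child in child_lists[node]:
--                 subtree_sizes[node] += subtree_sizes[child]
--
--     node_to_index = {node: index for index, node in enumerate(sequence)}
--
--     result = []
--     for i in range(len(u)):
--         if k[i] <= subtree_sizes[u[i] - 1]:
--             result.append(sequence[node_to_index[u[i] - 1] + k[i] - 1] + 1)
--         else:
--             result.append(-1)
--
--     return "\n".join(map(str, result))
-- ===== SOURCE B (Python) =====
-- def solve(p, u, k):
--     n = len(p) + 1
--     kids = [[] for _ in range(n)]
--     for i, parent in enumerate(p):
--         kids[parent - 1].append(i + 1)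
--     for v in range(n):
--         kids[v] = sorted(kids[v])
--
--     # BFS from the root: group the reachable nodes by depth
--     levels = []
--     cur = [0]
--     while cur:
--         levels.append(cur)
--         nxt = []
--         for v in cur:
--             nxt += kids[v]
--         cur = nxt
--
--     # subtree sizes, deepest level first (children are always one level deeper)
--     size = [0] * n
--     for lev in reversed(levels):
--         for v in lev:
--             size[v] = 1 + sum(size[c] for c in kids[v])
--
--     # preorder index of every reachable node, computed arithmetically level by level:
--     # a child starts right after its parent plus the subtrees of its smaller siblings
--     pos = {0: 0}
--     for lev in levels:
--         for v in lev:
--             q = pos[v] + 1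
--             for c in kids[v]:
--                 pos[c] = q
--                 q += size[c]
--
--     # the preorder sequence, reconstructed from the positions
--     order = [0] * size[0]
--     for v, i in pos.items():
--         order[i] = v
--
--     out = []
--     for v, kk in zip(u, k):
--         if kk <= size[v - 1]:
--             out.append(str(order[pos[v - 1] + kk - 1] + 1))
--         else:
--             out.append("-1")
--     return "\n".join(out)
-- ===== Notes on version B (the rewrite author's own statement) =====
-- stated objective: alternative
-- what changed: A's single interleaved DFS with a (node, processed)-flag stack that produces the preorder sequence and the subtree sizes in one walk is replaced by a stackless level scheme: a BFS groups the reachable nodes by depth, sizes are accumulated deepest level first, each node's preorder index is computed arithmetically (parent's index + 1 + sizes of its smaller siblings) without ever traversing in preorder, and the sequence is reconstructed by scattering nodes into an array at those indices; …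
-- outside the precondition, e.g. on solve([1, 1], [2], [-3]): A returns '1', B returns '1'; on solve([1, 1], [3], [-3]): A returns '2', B returns '2'
import Mathlib
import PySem

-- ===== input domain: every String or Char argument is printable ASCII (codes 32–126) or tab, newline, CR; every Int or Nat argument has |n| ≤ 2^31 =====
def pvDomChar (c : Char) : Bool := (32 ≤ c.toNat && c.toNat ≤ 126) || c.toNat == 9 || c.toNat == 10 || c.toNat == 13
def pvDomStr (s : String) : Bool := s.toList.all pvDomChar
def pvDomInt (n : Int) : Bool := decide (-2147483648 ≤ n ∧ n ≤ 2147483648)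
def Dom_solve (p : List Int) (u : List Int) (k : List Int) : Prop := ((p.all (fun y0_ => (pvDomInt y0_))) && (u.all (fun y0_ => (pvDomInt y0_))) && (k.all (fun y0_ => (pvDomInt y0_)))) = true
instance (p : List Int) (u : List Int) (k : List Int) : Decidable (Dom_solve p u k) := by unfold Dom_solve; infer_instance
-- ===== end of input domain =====

-- B replaces A's single flag-stack DFS (interleaving the preorder and the subtree sizes)
-- by a stackless level scheme: a BFS groups nodes by depth, sizes are accumulated deepest
-- level first, preorder indices are computed arithmetically (parent + 1 + earlier-sibling
-- sizes) and the sequence is scattered into an array (objective: alternative, same cost).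

-- ===== PORT A =====
-- A's while-loop over the (node, processed) stack, with fuel as a pure totality guard
-- (under Pre_solve the loop terminates well before the fuel runs out).
-- The Python stack pushes/pops at the END of the list; here the list HEAD is the stack top,
-- so "append (node,True); append reversed children" yields children-in-order ++ (node,true) :: rest.
def solveLoopA (cl : List (List Int)) : Nat → List Int → List Int → List (Int × Bool) → List Int × List Int
  | 0, seq, sz, _ => (seq, sz)
  | _ + 1, seq, sz, [] => (seq, sz)
  | fuel + 1, seq, sz, (node, processed) :: st =>
    if processed = false then
      solveLoopA cl fuel (seq ++ [node]) sz
        ((PySem.List.pyGetD cl node []).map (fun c => (c, false)) ++ (node, true) :: st)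
    else
      let sz1 := PySem.List.pySetD sz node 1
      let sz2 := (PySem.List.pyGetD cl node []).foldl
        (fun s c => PySem.List.pySetD s node (PySem.List.pyGetD s node 0 + PySem.List.pyGetD s c 0)) sz1
      solveLoopA cl fuel seq sz2 st

def solve (p : List Int) (u : List Int) (k : List Int) : String :=
  let n : Nat := p.length + 1
  -- child_lists = [[] for _ in range(n)]; then child_lists[parent-1].append(i + 1)
  -- (list indexing via pyGetD/pySetD: exact under Pre_solve, where all indices are in range)
  let child0 : List (List Int) := (List.range n).map (fun _ => ([] : List Int))
  let child1 := (PySem.List.enumerate p 0).foldl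
    (fun cl ip => PySem.List.pySetD cl (ip.2 - 1) (PySem.List.pyGetD cl (ip.2 - 1) [] ++ [ip.1 + 1])) child0
  -- for child_list in child_lists: child_list.sort()
  let childLists := child1.map (fun l => PySem.List.sorted l (fun x => x) false)
  let res := solveLoopA childLists (2 * n + 1) [] (List.replicate n 0) [(0, false)]
  let sequence := res.1
  let sizes := res.2
  -- node_to_index = {node: index for index, node in enumerate(sequence)}
  let nti := (PySem.List.enumerate sequence 0).foldl (fun d pr => d.insert pr.2 pr.1) PySem.Dict.empty
  -- query loop over range(len(u)); dict lookup via getD (exact under Pre_solve: no KeyError)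
  let result := (PySem.List.pyRange 0 (u.length : Int) 1).foldl (fun acc i =>
      if PySem.List.pyGetD k i 0 ≤ PySem.List.pyGetD sizes (PySem.List.pyGetD u i 0 - 1) 0 then
        acc ++ [PySem.List.pyGetD sequence (nti.getD (PySem.List.pyGetD u i 0 - 1) 0 + PySem.List.pyGetD k i 0 - 1) 0 + 1]
      else acc ++ [(-1 : Int)]) ([] : List Int)
  PySem.Str.join "\n" (result.map PySem.Int.toStr)

-- ===== PORT B =====
-- B's BFS loop: collect the levels (lists of nodes grouped by depth), each next level being
-- the concatenation of the child lists of the current one; fuel is a pure totality guard.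
def solveLevelsB (kd : List (List Int)) : Nat → List Int → List (List Int)
  | 0, _ => []
  | fuel + 1, cur =>
    if cur = [] then []
    else cur :: solveLevelsB kd fuel (cur.foldl (fun nxt v => nxt ++ PySem.List.pyGetD kd v []) [])

def solve_alt (p : List Int) (u : List Int) (k : List Int) : String :=
  let n : Nat := p.length + 1
  -- kids = [[] for _ in range(n)]; kids[parent-1].append(i + 1)  (pyGetD/pySetD: exact under Pre_solve)
  let kids0 : List (List Int) := (List.range n).map (fun _ => ([] : List Int))
  let kids1 := (PySem.List.enumerate p 0).foldl
    (fun cl ip => PySem.List.pySetD cl (ip.2 - 1) (PySem.List.pyGetD cl (ip.2 - 1) [] ++ [ip.1 + 1])) kids0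
  -- for v in range(n): kids[v] = sorted(kids[v])
  let kd := (PySem.List.pyRange 0 (n : Int) 1).foldl
    (fun cl v => PySem.List.pySetD cl v (PySem.List.sorted (PySem.List.pyGetD cl v []) (fun x => x) false)) kids1
  -- BFS from the root (the while loop runs at most n times: depths are < n)
  let levels := solveLevelsB kd (n + 1) [0]
  -- subtree sizes, deepest level first
  let size := levels.reverse.foldl (fun sz lev =>
      lev.foldl (fun sz v =>
        PySem.List.pySetD sz v (1 + ((PySem.List.pyGetD kd v []).map (fun c => PySem.List.pyGetD sz c 0)).sum)) sz)
    (List.replicate n (0 : Int))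
  -- pos = {0: 0}; each child's index = parent's index + 1 + sizes of its smaller siblings
  -- (pos[v] lookup via getD: exact under Pre_solve, where every processed node is a key)
  let pos := levels.foldl (fun d lev =>
      lev.foldl (fun d v =>
        ((PySem.List.pyGetD kd v []).foldl
          (fun dq c => (dq.1.insert c dq.2, dq.2 + PySem.List.pyGetD size c 0))
          (d, d.getD v 0 + 1)).1) d)
    ((PySem.Dict.empty : PySem.Dict Int Int).insert 0 0)
  -- order = [0] * size[0]; for v, i in pos.items(): order[i] = v
  let order := pos.items.foldl (fun ord vi => PySem.List.pySetD ord vi.2 vi.1)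
    (List.replicate (PySem.List.pyGetD size 0 0).toNat (0 : Int))
  let out := (u.zip k).foldl (fun acc vk =>
      if vk.2 ≤ PySem.List.pyGetD size (vk.1 - 1) 0 then
        acc ++ [PySem.Int.toStr (PySem.List.pyGetD order (pos.getD (vk.1 - 1) 0 + vk.2 - 1) 0 + 1)]
      else acc ++ ["-1"]) ([] : List String)
  PySem.Str.join "\n" out

-- ===== PRECONDITION & SPEC =====
-- Structural helpers for Pre_solve: number of nodes, CPython's negative-index wraparound,
-- the (wrapped) parent function of the stated tree and its iterates (the ancestor relation),
-- and the subtree size of a root-reachable node counted through that relation.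
def pvN (p : List Int) : Nat := p.length + 1

def pvWrap (n : Nat) (j : Int) : Int := if j < 0 then (n : Int) + j else j

def pvPar (p : List Int) (w : Int) : Int :=
  if w ≤ 0 then w else pvWrap (pvN p) (PySem.List.pyGetD p (w - 1) 0 - 1)

def pvParIter (p : List Int) : Nat → Int → Int
  | 0, w => w
  | j + 1, w => pvParIter p j (pvPar p w)

def pvSizeCount (p : List Int) (w : Int) : Int :=
  if 0 ≤ w ∧ w < (pvN p : Int) ∧ pvParIter p (pvN p - 1) w = 0 then
    (((List.range (pvN p)).countP (fun x =>
      (List.range (pvN p)).any (fun j => pvParIter p j (x : Int) == w)) : Nat) : Int)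
  else 0

-- Pre_solve: every parent index p[i]-1 is a valid (possibly negative, wrapping) index into a
-- length-n list, there are at least as many k's as u's, and each query (u[i], k[i]) is one A
-- answers without raising: u[i] in wrapping range, and either k[i] exceeds the subtree size of
-- the queried cell (answer -1, no dict lookup), or u[i] names a root-reachable node in 1..n and
-- k[i] ≥ 1 - (number of reachable nodes), so the sequence index stays in wrapping range.
-- Pre_ excludes inputs where Python A raises (a parent or query index out of range → IndexError,
-- an unreachable or negative queried node looked up in node_to_index → KeyError, k shorter than
-- u → IndexError) and, beyond those, queries whose k is below 1 - (number of reachable nodes)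
-- yet still answered through CPython's negative-index wraparound into the Euler sequence:
-- accidental values (B happens to return the same ones) no specification would promise.
def Pre_solve (p : List Int) (u : List Int) (k : List Int) : Prop :=
  (∀ i : Nat, ∀ h : i < p.length, 1 - ((p.length : Int) + 1) ≤ p[i] ∧ p[i] ≤ (p.length : Int) + 1) ∧
  u.length ≤ k.length ∧
  (∀ i : Nat, ∀ h : i < u.length,
    (1 - ((p.length : Int) + 1) ≤ u[i] ∧ u[i] ≤ (p.length : Int) + 1) ∧
    (pvSizeCount p (pvWrap (pvN p) (u[i] - 1)) < k.getD i 0 ∨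
     (1 ≤ u[i] ∧ pvParIter p (pvN p - 1) (u[i] - 1) = 0 ∧ 1 - pvSizeCount p 0 ≤ k.getD i 0)))

instance (p : List Int) (u : List Int) (k : List Int) : Decidable (Pre_solve p u k) := by
  unfold Pre_solve; infer_instance

def pvWitness_solve : List Int × List Int × List Int := ([1, 1, 2], [1, 2], [2, 1])

def Spec_solve (p : List Int) (u : List Int) (k : List Int) (out : String) : Prop := out = solve_alt p u k
instance (p : List Int) (u : List Int) (k : List Int) (out : String) : Decidable (Spec_solve p u k out) := by unfold Spec_solve; infer_instance

-- ===== CLAIM (what is proved, stated in full; the proofs are below) =====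
def Claim_equal_solve : Prop := ∀ (p : List Int) (u : List Int) (k : List Int), Dom_solve p u k → Pre_solve p u k → Spec_solve p u k (solve p u k)

-- ===== LEMMAS AND PROOFS =====

-- the parent-index part of Pre_solve: every p[i]-1 is a valid (possibly negative) list index
def pvHP (p : List Int) : Prop :=
  ∀ i : Nat, ∀ h : i < p.length, 1 - ((p.length : Int) + 1) ≤ p[i] ∧ p[i] ≤ (p.length : Int) + 1

-- a valid (0-based) node
def pvGood (p : List Int) (v : Int) : Prop := 0 ≤ v ∧ v < (pvN p : Int)

-- (raw parent index, child) pairs, and the child list of a node (in increasing order)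
def pvLp (p : List Int) : List (Int × Int) :=
  (PySem.List.enumerate p 0).map (fun ip => (ip.2 - 1, ip.1 + 1))

def pvKids (p : List Int) (v : Int) : List Int :=
  (((pvLp p).filter (fun q => pvWrap (pvN p) q.1 == v)).map (·.2))

lemma pv_mem_Lp {p : List Int} {q : Int × Int} :
    q ∈ pvLp p ↔ ∃ (i : Nat) (_ : i < p.length), q = (p[i] - 1, (i : Int) + 1) := by
  simp only [pvLp, List.mem_map, PySem.List.mem_enumerate_iff]
  constructor
  · rintro ⟨ip, ⟨i, hi, rfl⟩, rfl⟩; exact ⟨i, hi, by simp⟩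
  · rintro ⟨i, hi, rfl⟩; exact ⟨(i, p[i]), ⟨i, hi, by simp⟩, rfl⟩

lemma pv_mem_kids {p : List Int} {v c : Int} :
    c ∈ pvKids p v ↔ ∃ (i : Nat) (_ : i < p.length),
      pvWrap (pvN p) (p[i] - 1) = v ∧ c = (i : Int) + 1 := by
  simp only [pvKids, List.mem_map, List.mem_filter]
  constructor
  · rintro ⟨q, ⟨hq, hv⟩, rfl⟩
    rcases pv_mem_Lp.1 hq with ⟨i, hi, rfl⟩
    exact ⟨i, hi, by simpa using hv, rfl⟩
  · rintro ⟨i, hi, hv, rfl⟩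
    exact ⟨(p[i] - 1, (i : Int) + 1), ⟨pv_mem_Lp.2 ⟨i, hi, rfl⟩, by simpa using hv⟩, rfl⟩

lemma pv_wrap_good {p : List Int} (HP : pvHP p) {i : Nat} (hi : i < p.length) :
    pvGood p (pvWrap (pvN p) (p[i] - 1)) := by
  rcases HP i hi with ⟨h1, h2⟩
  have hn : (i : Int) < (p.length : Int) := by exact_mod_cast hi
  simp only [pvWrap, pvGood, pvN]
  split_ifs with hneg
  · push_cast; constructor <;> omega
  · push_cast; constructor <;> omega

lemma pv_kids_bound {p : List Int} (HP : pvHP p) {v c : Int} (hc : c ∈ pvKids p v) :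
    pvGood p v ∧ 1 ≤ c ∧ c ≤ (p.length : Int) := by
  rcases pv_mem_kids.1 hc with ⟨i, hi, hv, rfl⟩
  have hn : (i : Int) < (p.length : Int) := by exact_mod_cast hi
  exact ⟨hv ▸ pv_wrap_good HP hi, by omega, by omega⟩

lemma pv_good_of_mem_kids {p : List Int} (HP : pvHP p) {v c : Int} (hc : c ∈ pvKids p v) :
    pvGood p c := by
  rcases pv_kids_bound HP hc with ⟨_, h1, h2⟩
  exact ⟨by omega, by simp only [pvN]; push_cast; omega⟩

lemma pv_kids_pairwise {p : List Int} (v : Int) : (pvKids p v).Pairwise (· < ·) := by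
  have h1 : (pvLp p).Pairwise (fun q r => q.2 < r.2) := by
    refine List.Pairwise.map _ ?_ (PySem.List.pairwise_lt_enumerate p 0)
    intro a b hab; simpa using hab
  exact List.Pairwise.map _ (fun a b h => h) (h1.filter _)

lemma pv_parIter_add {p : List Int} (a b : Nat) (w : Int) :
    pvParIter p (b + a) w = pvParIter p a (pvParIter p b w) := by
  induction b generalizing w with
  | zero => simp [pvParIter]
  | succ b IH =>
    have : b + 1 + a = (b + a) + 1 := by omega
    rw [this]
    simp only [pvParIter]
    rw [IH]

lemma pv_parIter_zero_fix {p : List Int} (j : Nat) : pvParIter p j 0 = 0 := by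
  induction j with
  | zero => rfl
  | succ j IH => simp only [pvParIter, pvPar, if_pos (le_refl (0 : Int))]; exact IH

lemma pv_parIter_stable {p : List Int} {j : Nat} {v : Int} (h : pvParIter p j v = 0)
    (m : Nat) : pvParIter p (j + m) v = 0 := by
  rw [pv_parIter_add m j v, h, pv_parIter_zero_fix]

lemma pv_par_mem_kids {p : List Int} {v c : Int} (hc : c ∈ pvKids p v) : pvPar p c = v := by
  rcases pv_mem_kids.1 hc with ⟨i, hi, hv, rfl⟩
  have h1 : ¬ ((i : Int) + 1 ≤ 0) := by omega
  simp only [pvPar, if_neg h1, add_sub_cancel_right]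
  rw [PySem.List.pyGetD_natCast, List.getD_eq_getElem _ _ hi]
  exact hv

lemma pv_par_good {p : List Int} (HP : pvHP p) {v : Int} (hv : pvGood p v) :
    pvGood p (pvPar p v) := by
  by_cases hz : v ≤ 0
  · simpa only [pvPar, if_pos hz] using hv
  · rcases hv with ⟨h0, h1⟩
    have hi : (v - 1).toNat < p.length := by simp only [pvN] at h1; omega
    have hcast : ((v - 1).toNat : Int) = v - 1 := by omega
    simp only [pvPar, if_neg hz]
    rw [← hcast, PySem.List.pyGetD_natCast, List.getD_eq_getElem _ _ hi]
    exact pv_wrap_good HP hi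

lemma pv_parIter_good {p : List Int} (HP : pvHP p) :
    ∀ (j : Nat) (v : Int), pvGood p v → pvGood p (pvParIter p j v) := by
  intro j
  induction j with
  | zero => intro v hv; exact hv
  | succ j IH => intro v hv; exact IH _ (pv_par_good HP hv)

-- reachability from the root (closed form: n-1 parent steps always suffice, pv_reach_of_hit)
def pvReach (p : List Int) (v : Int) : Prop :=
  pvGood p v ∧ pvParIter p (pvN p - 1) v = 0

-- depth = number of parent steps until the root is first reached, computed with fuel
def pvD (p : List Int) : Nat → Int → Nat
  | 0, _ => 0
  | f + 1, v => if v = 0 then 0 else pvD p f (pvPar p v) + 1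

def pvDepth (p : List Int) (v : Int) : Nat := pvD p (pvN p) v

lemma pv_D_hit {p : List Int} :
    ∀ (j f : Nat) (v : Int), j < f → pvParIter p j v = 0 →
      pvParIter p (pvD p f v) v = 0 ∧ pvD p f v ≤ j := by
  intro j
  induction j with
  | zero =>
    intro f v hf h0
    obtain ⟨f', rfl⟩ : ∃ f', f = f' + 1 := ⟨f - 1, by omega⟩
    simp only [pvParIter] at h0
    subst h0
    simp [pvD, pvParIter]
  | succ j IH =>
    intro f v hf h0
    obtain ⟨f', rfl⟩ : ∃ f', f = f' + 1 := ⟨f - 1, by omega⟩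
    by_cases hv : v = 0
    · subst hv; simp [pvD, pvParIter]
    · simp only [pvD, if_neg hv]
      have h0' : pvParIter p j (pvPar p v) = 0 := h0
      rcases IH f' (pvPar p v) (by omega) h0' with ⟨ha, hb⟩
      exact ⟨ha, by omega⟩

lemma pv_D_min {p : List Int} :
    ∀ (j f : Nat) (v : Int), j < pvD p f v → pvParIter p j v ≠ 0 := by
  intro j
  induction j with
  | zero =>
    intro f v hj
    obtain ⟨f', rfl⟩ : ∃ f', f = f' + 1 := by
      rcases f with _ | f'
      · simp [pvD] at hj
      · exact ⟨f', rfl⟩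
    simp only [pvD] at hj
    by_cases hv : v = 0
    · simp [hv] at hj
    · simpa [pvParIter] using hv
  | succ j IH =>
    intro f v hj
    obtain ⟨f', rfl⟩ : ∃ f', f = f' + 1 := by
      rcases f with _ | f'
      · simp [pvD] at hj
      · exact ⟨f', rfl⟩
    simp only [pvD] at hj
    by_cases hv : v = 0
    · simp [hv] at hj
    · rw [if_neg hv] at hj
      exact IH f' (pvPar p v) (by omega)

lemma pv_depth_hit {p : List Int} {v : Int} (h : pvReach p v) :
    pvParIter p (pvDepth p v) v = 0 ∧ pvDepth p v ≤ pvN p - 1 := by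
  have hn : pvN p - 1 < pvN p := by simp [pvN]
  exact pv_D_hit (pvN p - 1) (pvN p) v hn h.2

lemma pv_depth_min {p : List Int} {j : Nat} {v : Int} (hj : j < pvDepth p v) :
    pvParIter p j v ≠ 0 := pv_D_min j (pvN p) v hj

-- pigeonhole: if the parent chain ever reaches the root, it does so within n-1 steps
lemma pv_reach_of_hit {p : List Int} (HP : pvHP p) {v : Int} (hg : pvGood p v)
    {j : Nat} (h : pvParIter p j v = 0) : pvReach p v := by
  classical
  refine ⟨hg, ?_⟩
  rcases pv_D_hit j (j + 1) v (by omega) h with ⟨hm, hmj⟩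
  set m := pvD p (j + 1) v with hmdef
  have hdist : ∀ a b : Nat, a < b → b < m → pvParIter p a v ≠ pvParIter p b v := by
    intro a b hab hbm heq
    have hz : pvParIter p (a + (m - b)) v = 0 := by
      have h1 : pvParIter p (a + (m - b)) v = pvParIter p (m - b) (pvParIter p a v) :=
        pv_parIter_add (m - b) a v
      have h2 : pvParIter p (b + (m - b)) v = pvParIter p (m - b) (pvParIter p b v) :=
        pv_parIter_add (m - b) b v
      rw [h1, heq, ← h2, show b + (m - b) = m from by omega, hm]
    exact pv_D_min (a + (m - b)) (j + 1) v (by omega) hz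
  have hlen : m ≤ pvN p - 1 := by
    by_contra hgt
    push_neg at hgt
    have hL : ((List.range (pvN p)).map (fun a => pvParIter p a v)).Nodup := by
      rw [List.nodup_map_iff_inj_on List.nodup_range]
      intro a ha b hb hab
      rw [List.mem_range] at ha hb
      rcases Nat.lt_trichotomy a b with hlt | rfl | hlt
      · exact absurd hab (hdist a b hlt (by omega))
      · rfl
      · exact absurd hab.symm (hdist b a hlt (by omega))
    have hsub : ((List.range (pvN p)).map (fun a => pvParIter p a v))
        ⊆ PySem.List.pyRange 1 (pvN p) 1 := by
      intro x hx
      rcases List.mem_map.1 hx with ⟨a, ha, rfl⟩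
      rw [List.mem_range] at ha
      have hgood := pv_parIter_good HP a v hg
      have hne : pvParIter p a v ≠ 0 := pv_D_min a (j + 1) v (by omega)
      rw [PySem.List.mem_pyRange_one]
      rcases hgood with ⟨h0, h1⟩
      omega
    have hcard : ((List.range (pvN p)).map (fun a => pvParIter p a v)).length
        ≤ (PySem.List.pyRange 1 (pvN p) 1).length := by
      calc ((List.range (pvN p)).map (fun a => pvParIter p a v)).length
          = ((List.range (pvN p)).map (fun a => pvParIter p a v)).toFinset.card :=
            (List.toFinset_card_of_nodup hL).symm
        _ ≤ (PySem.List.pyRange 1 (pvN p) 1).toFinset.card := Finset.card_le_card (fun x hx => by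
            rw [List.mem_toFinset] at *; exact hsub hx)
        _ ≤ (PySem.List.pyRange 1 (pvN p) 1).length := List.toFinset_card_le _
    rw [List.length_map, List.length_range, PySem.List.length_pyRange_one] at hcard
    have hnn : 1 ≤ pvN p := by simp [pvN]
    omega
  calc pvParIter p (pvN p - 1) v
      = pvParIter p (m + (pvN p - 1 - m)) v := by congr 1; omega
    _ = 0 := pv_parIter_stable hm _

lemma pv_reach_zero (p : List Int) : pvReach p 0 :=
  ⟨⟨le_refl 0, by simp only [pvN]; push_cast; omega⟩, pv_parIter_zero_fix _⟩

-- children of a reachable node are reachable, one level deeper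
lemma pv_depth_child {p : List Int} (HP : pvHP p) {v c : Int}
    (hv : pvReach p v) (hc : c ∈ pvKids p v) :
    pvReach p c ∧ pvDepth p c = pvDepth p v + 1 := by
  have hgc : pvGood p c := pv_good_of_mem_kids HP hc
  have hpar : pvPar p c = v := pv_par_mem_kids hc
  have hc1 : 1 ≤ c := (pv_kids_bound HP hc).2.1
  have hhit : pvParIter p (pvDepth p v + 1) c = 0 := by
    have : pvParIter p (pvDepth p v + 1) c = pvParIter p (pvDepth p v) (pvPar p c) := rfl
    rw [this, hpar]
    exact (pv_depth_hit hv).1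
  have hrc : pvReach p c := pv_reach_of_hit HP hgc hhit
  refine ⟨hrc, ?_⟩
  have hdc0 : 0 < pvDepth p c := by
    rcases Nat.eq_zero_or_pos (pvDepth p c) with h0 | h; swap
    · exact h
    · exfalso
      have := (pv_depth_hit hrc).1
      rw [h0] at this
      simp only [pvParIter] at this
      omega
  have hge : pvDepth p v + 1 ≤ pvDepth p c := by
    by_contra hlt
    push_neg at hlt
    have h1 : pvParIter p (pvDepth p c - 1) v = 0 := by
      have h2 := (pv_depth_hit hrc).1
      have h3 : pvParIter p (pvDepth p c) c
          = pvParIter p (pvDepth p c - 1) (pvPar p c) := by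
        conv_lhs => rw [show pvDepth p c = (pvDepth p c - 1) + 1 from by omega]
        rfl
      rw [h3, hpar] at h2
      exact h2
    exact pv_depth_min (by omega) h1
  have hle : pvDepth p c ≤ pvDepth p v + 1 := by
    by_contra hgt
    push_neg at hgt
    exact pv_depth_min (by omega) hhit
  omega

lemma pv_depth_lt {p : List Int} {v : Int} (hv : pvReach p v) : pvDepth p v < pvN p := by
  have := (pv_depth_hit hv).2
  have : pvN p ≥ 1 := by simp [pvN]
  omega

-- an ancestor (a parent iterate) of a reachable node that is not the root sits at
-- exactly depth (depth w - j)
lemma pv_anc_depth {p : List Int} (HP : pvHP p) {w c : Int} {j : Nat}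
    (hw : pvReach p w) (hj : pvParIter p j w = c) (hc1 : 1 ≤ c) :
    j ≤ pvDepth p w ∧ pvReach p c ∧ pvDepth p c = pvDepth p w - j := by
  have hjle : j ≤ pvDepth p w := by
    by_contra hgt
    push_neg at hgt
    have : c = 0 := by
      rw [← hj, show j = pvDepth p w + (j - pvDepth p w) from by omega,
        pv_parIter_stable (pv_depth_hit hw).1]
    omega
  have hgc : pvGood p c := hj ▸ pv_parIter_good HP j w hw.1
  have hhit : pvParIter p (pvDepth p w - j) c = 0 := by
    rw [← hj, ← pv_parIter_add _ _ w, show j + (pvDepth p w - j) = pvDepth p w from by omega]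
    exact (pv_depth_hit hw).1
  have hrc : pvReach p c := pv_reach_of_hit HP hgc hhit
  refine ⟨hjle, hrc, ?_⟩
  have hle : pvDepth p c ≤ pvDepth p w - j := by
    by_contra hgt
    push_neg at hgt
    exact pv_depth_min (by omega) hhit
  have hge : pvDepth p w - j ≤ pvDepth p c := by
    by_contra hlt
    push_neg at hlt
    have : pvParIter p (j + pvDepth p c) w = 0 := by
      rw [pv_parIter_add _ _ w, hj]
      exact (pv_depth_hit hrc).1
    exact pv_depth_min (show j + pvDepth p c < pvDepth p w from by omega) this
  omega

-- preorder of the subtree of v, with fuel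
def pvPre (p : List Int) : Nat → Int → List Int
  | 0, _ => []
  | f + 1, v => v :: ((pvKids p v).map (pvPre p f)).flatten

def pvTour (p : List Int) (v : Int) : List Int := pvPre p (pvN p) v

def pvSize (p : List Int) (v : Int) : Int := ((pvTour p v).length : Int)

lemma pv_pre_congr {p : List Int} (HP : pvHP p) :
    ∀ (m f g : Nat) (v : Int), pvReach p v → pvN p - pvDepth p v ≤ m →
      pvN p - pvDepth p v ≤ f → pvN p - pvDepth p v ≤ g → pvPre p f v = pvPre p g v := by
  intro m
  induction m with
  | zero =>
    intro f g v hv hm hf hg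
    exfalso
    have := pv_depth_lt hv
    omega
  | succ m IH =>
    intro f g v hv hm hf hg
    have hdv := pv_depth_lt hv
    obtain ⟨f', rfl⟩ : ∃ f', f = f' + 1 := ⟨f - 1, by omega⟩
    obtain ⟨g', rfl⟩ : ∃ g', g = g' + 1 := ⟨g - 1, by omega⟩
    simp only [pvPre]
    congr 1
    apply congrArg List.flatten
    apply List.map_congr_left
    intro c hc
    rcases pv_depth_child HP hv hc with ⟨hrc, hdc⟩
    have hdc2 := pv_depth_lt hrc
    exact IH f' g' c hrc (by omega) (by omega) (by omega)

lemma pv_tour_unfold {p : List Int} (HP : pvHP p) {v : Int} (hv : pvReach p v) :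
    pvTour p v = v :: ((pvKids p v).map (pvTour p)).flatten := by
  have hdv := pv_depth_lt hv
  obtain ⟨m, hm⟩ : ∃ m, pvN p = m + 1 := ⟨p.length, rfl⟩
  conv_lhs => rw [pvTour, hm]
  simp only [pvPre]
  congr 1
  apply congrArg List.flatten
  apply List.map_congr_left
  intro c hc
  rcases pv_depth_child HP hv hc with ⟨hrc, hdc⟩
  have hdc2 := pv_depth_lt hrc
  rw [pvTour]
  exact pv_pre_congr HP (pvN p) m (pvN p) c hrc (by omega) (by omega) (by omega)

lemma pv_mem_pre_bound {p : List Int} (HP : pvHP p) :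
    ∀ (f : Nat) (v w : Int), pvReach p v → w ∈ pvPre p f v →
      pvReach p w ∧ pvDepth p v ≤ pvDepth p w := by
  intro f
  induction f with
  | zero => intro v w _ h; simp [pvPre] at h
  | succ f IH =>
    intro v w hv hw
    simp only [pvPre, List.mem_cons, List.mem_flatten, List.mem_map] at hw
    rcases hw with rfl | ⟨l, ⟨c, hc, rfl⟩, hwl⟩
    · exact ⟨hv, le_refl _⟩
    · rcases pv_depth_child HP hv hc with ⟨hrc, hdc⟩
      rcases IH c w hrc hwl with ⟨hwg, hcw⟩
      exact ⟨hwg, by omega⟩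

lemma pv_mem_tour_self {p : List Int} (HP : pvHP p) {v : Int} (hv : pvReach p v) :
    v ∈ pvTour p v := by
  rw [pv_tour_unfold HP hv]; exact List.mem_cons_self

lemma pv_size_eq {p : List Int} (HP : pvHP p) {v : Int} (hv : pvReach p v) :
    pvSize p v = 1 + ((pvKids p v).map (pvSize p)).sum := by
  rw [pvSize, pv_tour_unfold HP hv]
  simp only [List.length_cons, List.length_flatten, List.map_map]
  push_cast [Nat.cast_list_sum]
  simp only [List.map_map]
  ring_nf
  rfl

lemma pv_anc {p : List Int} :
    ∀ (f : Nat) (c w : Int), w ∈ pvPre p f c → ∃ j, pvParIter p j w = c := by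
  intro f
  induction f with
  | zero => intro c w h; simp [pvPre] at h
  | succ f IH =>
    intro c w hw
    simp only [pvPre, List.mem_cons, List.mem_flatten, List.mem_map] at hw
    rcases hw with rfl | ⟨l, ⟨c', hc', rfl⟩, hwl⟩
    · exact ⟨0, rfl⟩
    · rcases IH c' w hwl with ⟨j, hj⟩
      refine ⟨j + 1, ?_⟩
      have hadd : pvParIter p (j + 1) w = pvParIter p 1 (pvParIter p j w) := pv_parIter_add 1 j w
      rw [hadd, hj]
      simpa only [pvParIter] using pv_par_mem_kids hc'

lemma pv_sib_disjoint {p : List Int} (HP : pvHP p) {v c1 c2 : Int} (hv : pvReach p v)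
    (h1 : c1 ∈ pvKids p v) (h2 : c2 ∈ pvKids p v) (hne : c1 ≠ c2)
    (f g : Nat) : ∀ w, w ∈ pvPre p f c1 → w ∈ pvPre p g c2 → False := by
  intro w hw1 hw2
  rcases pv_depth_child HP hv h1 with ⟨hr1, hd1⟩
  rcases pv_depth_child HP hv h2 with ⟨hr2, hd2⟩
  have hrw : pvReach p w := (pv_mem_pre_bound HP f c1 w hr1 hw1).1
  rcases pv_anc f c1 w hw1 with ⟨j1, hj1⟩
  rcases pv_anc g c2 w hw2 with ⟨j2, hj2⟩
  rcases pv_anc_depth HP hrw hj1 (pv_kids_bound HP h1).2.1 with ⟨hle1, _, hdd1⟩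
  rcases pv_anc_depth HP hrw hj2 (pv_kids_bound HP h2).2.1 with ⟨hle2, _, hdd2⟩
  have : j1 = j2 := by omega
  exact hne (by rw [← hj1, ← hj2, this])

lemma pv_nodup_pre {p : List Int} (HP : pvHP p) :
    ∀ (f : Nat) (v : Int), pvReach p v → (pvPre p f v).Nodup := by
  intro f
  induction f with
  | zero => intro v _; simp [pvPre]
  | succ f IH =>
    intro v hv
    simp only [pvPre]
    refine List.Nodup.cons ?_ ?_
    · intro hmem
      simp only [List.mem_flatten, List.mem_map] at hmem
      rcases hmem with ⟨l, ⟨c, hc, rfl⟩, hvl⟩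
      rcases pv_depth_child HP hv hc with ⟨hrc, hdc⟩
      rcases pv_mem_pre_bound HP f c v hrc hvl with ⟨_, hcv⟩
      omega
    · rw [List.nodup_flatten]
      constructor
      · intro l hl
        simp only [List.mem_map] at hl
        rcases hl with ⟨c, hc, rfl⟩
        exact IH c (pv_depth_child HP hv hc).1
      · rw [List.pairwise_map]
        refine List.Pairwise.imp_of_mem ?_ (pv_kids_pairwise (p := p) v)
        intro c1 c2 hc1 hc2 hlt w hw1 hw2
        exact pv_sib_disjoint HP hv hc1 hc2 (by omega) f f w hw1 hw2

lemma pv_tour_length_le {p : List Int} (HP : pvHP p) {v : Int} (hv : pvReach p v) :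
    (pvTour p v).length ≤ pvN p := by
  have hnd : (pvTour p v).Nodup := pv_nodup_pre HP (pvN p) v hv
  have hsub : pvTour p v ⊆ PySem.List.pyRange 0 (pvN p) 1 := by
    intro w hw
    rcases pv_mem_pre_bound HP (pvN p) v w hv hw with ⟨⟨⟨h0, h1⟩, _⟩, _⟩
    rw [PySem.List.mem_pyRange_one]
    exact ⟨h0, h1⟩
  classical
  calc (pvTour p v).length ≤ (PySem.List.pyRange 0 (pvN p) 1).length := by
        calc (pvTour p v).length = (pvTour p v).toFinset.card :=
              (List.toFinset_card_of_nodup hnd).symm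
          _ ≤ (PySem.List.pyRange 0 (pvN p) 1).toFinset.card := Finset.card_le_card (fun x hx => by
              rw [List.mem_toFinset] at *; exact hsub hx)
          _ ≤ (PySem.List.pyRange 0 (pvN p) 1).length := List.toFinset_card_le _
    _ = pvN p := by rw [PySem.List.length_pyRange_one]; omega

-- basic facts about pyGetD / pySetD on Int lists and generic element lists
lemma pv_getD_setD {α : Type} (s : List α) (v w : Int) (x : α) (d : α)
    (h0 : 0 ≤ v) (h1 : v < (s.length : Int)) (hw : 0 ≤ w) :
    PySem.List.pyGetD (PySem.List.pySetD s v x) w d =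
      if w = v then x else PySem.List.pyGetD s w d := by
  have hv' : v = ((v.toNat : Nat) : Int) := by omega
  have hw' : w = ((w.toNat : Nat) : Int) := by omega
  rw [hv', hw', PySem.List.pyGetD_pySetD_natCast s v.toNat w.toNat x d (by omega)]
  by_cases h : w.toNat = v.toNat
  · rw [if_pos h, if_pos (by omega)]
  · rw [if_neg h, if_neg (by omega)]

lemma pv_len_setD {α : Type} (s : List α) (v : Int) (x : α) :
    (PySem.List.pySetD s v x).length = s.length := PySem.List.length_pySetD s v x

lemma pv_getD_replicate (n : Nat) (w : Int) :
    PySem.List.pyGetD (List.replicate n (0 : Int)) w 0 = 0 := by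
  by_cases hin : PySem.Raise.InRange (List.replicate n (0 : Int)).length w
  · have := PySem.List.pyGetD_mem (xs := List.replicate n (0 : Int)) (i := w) (d := 0) hin
    simpa using List.eq_of_mem_replicate (by simpa using this)
  · rw [PySem.List.pyGetD_of_none _ _ _ ((PySem.List.pyGet?_eq_none_iff _ _).2 hin)]

lemma pv_getD_map_const {α : Type} (n : Nat) (w : Int) (d : α) :
    PySem.List.pyGetD ((List.range n).map (fun _ => d)) w d = d := by
  by_cases hin : PySem.Raise.InRange ((List.range n).map (fun _ => d)).length w
  · have := PySem.List.pyGetD_mem ((List.range n).map (fun _ => d)) d hin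
    rcases List.mem_map.1 this with ⟨x, _, hx⟩
    exact hx.symm
  · rw [PySem.List.pyGetD_of_none _ _ _ ((PySem.List.pyGet?_eq_none_iff _ _).2 hin)]

lemma pv_list_ext (s1 s2 : List Int) (hl : s1.length = s2.length)
    (h : ∀ w : Int, 0 ≤ w → PySem.List.pyGetD s1 w 0 = PySem.List.pyGetD s2 w 0) : s1 = s2 := by
  apply List.ext_getElem hl
  intro j hj1 hj2
  have := h (j : Int) (by omega)
  rw [PySem.List.pyGetD_eq_getElem _ _ (by omega) (by exact_mod_cast hj1),
      PySem.List.pyGetD_eq_getElem _ _ (by omega) (by exact_mod_cast hj2)] at this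
  simpa using this

-- a negative in-range index sets the same cell as its wrapped nonnegative form
lemma pv_setD_wrap {α : Type} (s : List α) (v : Int) (x : α)
    (h1 : -(s.length : Int) ≤ v) (_h2 : v < (s.length : Int)) :
    PySem.List.pySetD s v x = PySem.List.pySetD s (pvWrap s.length v) x := by
  by_cases hneg : v < 0
  · have h3 : pvWrap s.length v = (s.length : Int) + v := by simp [pvWrap, if_pos hneg]
    rw [h3]
    have hidx : PySem.List.pyIdx? s.length v = PySem.List.pyIdx? s.length ((s.length : Int) + v) := by
      simp only [PySem.List.pyIdx?]
      rw [if_neg (by omega), if_pos (by omega : -(s.length : Int) ≤ v),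
        if_pos (by omega : (0 : Int) ≤ (s.length : Int) + v),
        if_pos (by omega : (s.length : Int) + v < (s.length : Int))]
      congr 1
      omega
    simp only [PySem.List.pySetD, PySem.List.pySet?, hidx]
  · simp [pvWrap, if_neg hneg]

lemma pv_getD_setD_wrap {α : Type} (s : List α) (v w : Int) (x : α) (d : α)
    (h1 : -(s.length : Int) ≤ v) (h2 : v < (s.length : Int)) (hw : 0 ≤ w) :
    PySem.List.pyGetD (PySem.List.pySetD s v x) w d =
      if w = pvWrap s.length v then x else PySem.List.pyGetD s w d := by
  rw [pv_setD_wrap s v x h1 h2]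
  have hg : 0 ≤ pvWrap s.length v ∧ pvWrap s.length v < (s.length : Int) := by
    simp only [pvWrap]; split_ifs <;> constructor <;> omega
  exact pv_getD_setD s _ w x d hg.1 hg.2 hw

-- A's child-list building loop (over an abstract pair list); indices may be negative
-- (CPython wraparound), hence the pvWrap in the filter
lemma pv_foldl_setD_append (L : List (Int × Int)) :
    ∀ (cl : List (List Int)), (∀ q ∈ L, -(cl.length : Int) ≤ q.1 ∧ q.1 < (cl.length : Int)) →
    (L.foldl (fun cl q => PySem.List.pySetD cl q.1 (PySem.List.pyGetD cl q.1 [] ++ [q.2])) cl).length = cl.length ∧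
    ∀ v, 0 ≤ v → PySem.List.pyGetD (L.foldl (fun cl q => PySem.List.pySetD cl q.1 (PySem.List.pyGetD cl q.1 [] ++ [q.2])) cl) v []
      = PySem.List.pyGetD cl v [] ++ (L.filter (fun q => pvWrap cl.length q.1 == v)).map (·.2) := by
  induction L with
  | nil => intro cl _; simp
  | cons q L IH =>
    intro cl hB
    have hq := hB q List.mem_cons_self
    set cl1 := PySem.List.pySetD cl q.1 (PySem.List.pyGetD cl q.1 [] ++ [q.2]) with hcl1
    have hlen1 : cl1.length = cl.length := pv_len_setD _ _ _
    have hB1 : ∀ r ∈ L, -(cl1.length : Int) ≤ r.1 ∧ r.1 < (cl1.length : Int) := by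
      intro r hr; rw [hlen1]; exact hB r (List.mem_cons_of_mem _ hr)
    rcases IH cl1 hB1 with ⟨hlen, hget⟩
    simp only [List.foldl_cons]
    refine ⟨by rw [← hcl1, hlen, hlen1], ?_⟩
    intro v hv0
    rw [← hcl1, hget v hv0, hcl1, pv_getD_setD_wrap _ _ _ _ _ hq.1 hq.2 hv0]
    rw [show (PySem.List.pySetD cl q.1 (PySem.List.pyGetD cl q.1 [] ++ [q.2])).length
        = cl.length from pv_len_setD _ _ _]
    have hgw : PySem.List.pyGetD cl q.1 [] = PySem.List.pyGetD cl (pvWrap cl.length q.1) [] := by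
      by_cases hneg : q.1 < 0
      · simp only [pvWrap, if_pos hneg]
        have hk0 : 0 < (-q.1).toNat := by omega
        have hkl : (-q.1).toNat ≤ cl.length := by omega
        have hq1 : q.1 = -(((-q.1).toNat : Nat) : Int) := by omega
        rw [hq1, PySem.List.pyGetD_neg_natCast _ _ _ hk0 hkl]
        rw [PySem.List.pyGetD_eq_getElem _ _ (by omega) (by omega)]
        congr 1
        omega
      · simp [pvWrap, if_neg hneg]
    by_cases hv : v = pvWrap cl.length q.1
    · subst hv
      rw [if_pos rfl, hgw, List.filter_cons]
      simp [List.append_assoc]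
    · have hfc : (pvWrap cl.length q.1 == v) = false := by
        simp only [beq_eq_false_iff_ne, ne_eq]
        exact fun h => hv h.symm
      rw [if_neg hv, List.filter_cons]
      simp [hfc]

-- B's per-index sorting loop over the child-list array
lemma pv_list_sort_getD (L : List Int) :
    ∀ (cl : List (List Int)), (∀ x ∈ L, 0 ≤ x ∧ x < (cl.length : Int)) → L.Nodup →
    ((L.foldl (fun cl v => PySem.List.pySetD cl v
        (PySem.List.sorted (PySem.List.pyGetD cl v []) (fun x => x) false)) cl).length = cl.length ∧
     ∀ v, 0 ≤ v → PySem.List.pyGetD (L.foldl (fun cl v => PySem.List.pySetD cl v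
        (PySem.List.sorted (PySem.List.pyGetD cl v []) (fun x => x) false)) cl) v []
       = if v ∈ L then PySem.List.sorted (PySem.List.pyGetD cl v []) (fun x => x) false
         else PySem.List.pyGetD cl v []) := by
  induction L with
  | nil => intro cl _ _; simp
  | cons a L IH =>
    intro cl hB hnd
    rcases List.nodup_cons.1 hnd with ⟨ha, hnd'⟩
    have hab := hB a List.mem_cons_self
    set cl1 := PySem.List.pySetD cl a
      (PySem.List.sorted (PySem.List.pyGetD cl a []) (fun x => x) false) with hcl1
    have hlen1 : cl1.length = cl.length := pv_len_setD _ _ _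
    have hg1 : ∀ w, 0 ≤ w → PySem.List.pyGetD cl1 w [] =
        if w = a then PySem.List.sorted (PySem.List.pyGetD cl a []) (fun x => x) false
        else PySem.List.pyGetD cl w [] := by
      intro w hw; rw [hcl1]; exact pv_getD_setD _ _ _ _ _ hab.1 hab.2 hw
    rcases IH cl1 (fun x hx => by rw [hlen1]; exact hB x (List.mem_cons_of_mem _ hx)) hnd'
      with ⟨hl, hget⟩
    simp only [List.foldl_cons]
    refine ⟨by rw [← hcl1, hl, hlen1], ?_⟩
    intro v hv
    rw [← hcl1, hget v hv]
    by_cases hvL : v ∈ L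
    · have hva : v ≠ a := fun h => ha (h ▸ hvL)
      rw [if_pos hvL, if_pos (List.mem_cons_of_mem _ hvL), hg1 v hv, if_neg hva]
    · by_cases hva : v = a
      · subst hva
        rw [if_neg hvL, if_pos List.mem_cons_self, hg1 v hv, if_pos rfl]
      · rw [if_neg hvL, if_neg (by simp [hva, hvL]), hg1 v hv, if_neg hva]

lemma pv_loopA_nil (cl : List (List Int)) (f : Nat) (seq sz : List Int) :
    solveLoopA cl f seq sz [] = (seq, sz) := by
  cases f <;> simp [solveLoopA]

-- the inner size-accumulation loop of A's processed branch
lemma pv_inner_fold (cs : List Int) :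
    ∀ (s : List Int) (v : Int), (∀ c ∈ cs, 0 ≤ c ∧ c ≠ v) → 0 ≤ v → v < (s.length : Int) →
    ((cs.foldl (fun s c => PySem.List.pySetD s v (PySem.List.pyGetD s v 0 + PySem.List.pyGetD s c 0)) s).length = s.length ∧
     PySem.List.pyGetD (cs.foldl (fun s c => PySem.List.pySetD s v (PySem.List.pyGetD s v 0 + PySem.List.pyGetD s c 0)) s) v 0
       = PySem.List.pyGetD s v 0 + (cs.map (fun c => PySem.List.pyGetD s c 0)).sum ∧
     ∀ w, 0 ≤ w → w ≠ v → PySem.List.pyGetD (cs.foldl (fun s c => PySem.List.pySetD s v (PySem.List.pyGetD s v 0 + PySem.List.pyGetD s c 0)) s) w 0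
       = PySem.List.pyGetD s w 0) := by
  induction cs with
  | nil => intro s v _ _ _; simp
  | cons c cs IH =>
    intro s v hcs h0 h1
    have hc := hcs c List.mem_cons_self
    set s1 := PySem.List.pySetD s v (PySem.List.pyGetD s v 0 + PySem.List.pyGetD s c 0) with hs1
    have hlen1 : s1.length = s.length := pv_len_setD _ _ _
    have hg1 : ∀ w, 0 ≤ w → PySem.List.pyGetD s1 w 0 =
        if w = v then PySem.List.pyGetD s v 0 + PySem.List.pyGetD s c 0 else PySem.List.pyGetD s w 0 := by
      intro w hw; rw [hs1]; exact pv_getD_setD _ _ _ _ _ h0 h1 hw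
    rcases IH s1 v (fun c' hc' => hcs c' (List.mem_cons_of_mem _ hc')) h0 (by rw [hlen1]; exact h1) with ⟨hl, hv, hw⟩
    simp only [List.foldl_cons]
    refine ⟨by rw [← hs1, hl, hlen1], ?_, ?_⟩
    · rw [← hs1, hv]
      have h2 : PySem.List.pyGetD s1 v 0 = PySem.List.pyGetD s v 0 + PySem.List.pyGetD s c 0 := by
        rw [hg1 v h0, if_pos rfl]
      have h3 : (cs.map (fun c' => PySem.List.pyGetD s1 c' 0)) = (cs.map (fun c' => PySem.List.pyGetD s c' 0)) := by
        apply List.map_congr_left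
        intro c' hc'
        rcases hcs c' (List.mem_cons_of_mem _ hc') with ⟨hge, hne⟩
        rw [hg1 c' hge, if_neg hne]
      rw [h2, h3, List.map_cons, List.sum_cons]
      ring
    · intro w hw0 hwv
      rw [← hs1, hw w hw0 hwv, hg1 w hw0, if_neg hwv]

-- A's main loop processes a block of unprocessed frames into the tour and the sizes
lemma pv_loopA {p : List Int} (HP : pvHP p) (cl : List (List Int))
    (hcl : ∀ v, pvGood p v → PySem.List.pyGetD cl v [] = pvKids p v) :
    ∀ (N : Nat) (vs : List Int) (f : Nat) (st : List (Int × Bool)) (seq sz : List Int),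
      N = 2 * ((vs.map (pvTour p)).flatten).length + f →
      (∀ v ∈ vs, pvReach p v) → sz.length = pvN p →
      ∃ sz', solveLoopA cl N seq sz (vs.map (fun v => (v, false)) ++ st)
           = solveLoopA cl f (seq ++ (vs.map (pvTour p)).flatten) sz' st
        ∧ sz'.length = pvN p
        ∧ ∀ w, 0 ≤ w → PySem.List.pyGetD sz' w 0 =
            if w ∈ (vs.map (pvTour p)).flatten then pvSize p w else PySem.List.pyGetD sz w 0 := by
  intro N
  induction N using Nat.strong_induction_on with
  | _ N IH =>
    intro vs f st seq sz hN hg hlen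
    rcases vs with _ | ⟨v, vs'⟩
    · refine ⟨sz, ?_, hlen, ?_⟩
      · simp only [List.map_nil, List.flatten_nil, List.nil_append, List.append_nil]
        simp only [List.map_nil, List.flatten_nil, List.length_nil] at hN
        rw [hN]; ring_nf
      · intro w _; simp
    · have hv := hg v List.mem_cons_self
      have htv := pv_tour_unfold HP hv
      have hKg : ∀ c ∈ pvKids p v, pvReach p c := fun c hc => (pv_depth_child HP hv hc).1
      have hlt : (pvTour p v).length = 1 + ((pvKids p v).map (pvTour p)).flatten.length := by
        rw [htv]; simp [List.length_cons]; omega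
      have hN2 : N = 2 * ((1 + ((pvKids p v).map (pvTour p)).flatten.length)
          + ((vs'.map (pvTour p)).flatten).length) + f := by
        rw [hN]; simp only [List.map_cons, List.flatten_cons, List.length_append]; omega
      obtain ⟨N', rfl⟩ : ∃ N', N = N' + 1 := ⟨N - 1, by omega⟩
      simp only [List.map_cons, List.cons_append]
      rw [show solveLoopA cl (N' + 1) seq sz ((v, false) :: (vs'.map (fun v => (v, false)) ++ st))
            = solveLoopA cl N' (seq ++ [v]) sz
                ((PySem.List.pyGetD cl v []).map (fun c => (c, false)) ++ (v, true) :: (vs'.map (fun v => (v, false)) ++ st))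
          from by simp [solveLoopA]]
      rw [hcl v hv.1]
      rcases IH N' (by omega) (pvKids p v) (1 + (2 * ((vs'.map (pvTour p)).flatten).length + f))
          ((v, true) :: (vs'.map (fun v => (v, false)) ++ st)) (seq ++ [v]) sz
          (by omega) hKg hlen with ⟨sz1, heq1, hlen1, hpt1⟩
      rw [heq1]
      rw [show 1 + (2 * ((vs'.map (pvTour p)).flatten).length + f)
            = (2 * ((vs'.map (pvTour p)).flatten).length + f) + 1 from by omega]
      rw [show solveLoopA cl ((2 * ((vs'.map (pvTour p)).flatten).length + f) + 1)
              ((seq ++ [v]) ++ ((pvKids p v).map (pvTour p)).flatten) sz1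
              ((v, true) :: (vs'.map (fun v => (v, false)) ++ st))
            = solveLoopA cl (2 * ((vs'.map (pvTour p)).flatten).length + f)
              ((seq ++ [v]) ++ ((pvKids p v).map (pvTour p)).flatten)
              ((PySem.List.pyGetD cl v []).foldl
                (fun s c => PySem.List.pySetD s v (PySem.List.pyGetD s v 0 + PySem.List.pyGetD s c 0))
                (PySem.List.pySetD sz1 v 1))
              (vs'.map (fun v => (v, false)) ++ st)
          from by simp [solveLoopA]]
      rw [hcl v hv.1]
      set s0 := PySem.List.pySetD sz1 v 1 with hs0
      have hlens0 : s0.length = pvN p := by rw [hs0, pv_len_setD, hlen1]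
      have hgs0 : ∀ w, 0 ≤ w → PySem.List.pyGetD s0 w 0 =
          if w = v then 1 else PySem.List.pyGetD sz1 w 0 := by
        intro w hw; rw [hs0]; exact pv_getD_setD _ _ _ _ _ hv.1.1 (by rw [hlen1]; exact hv.1.2) hw
      have hcs : ∀ c ∈ pvKids p v, 0 ≤ c ∧ c ≠ v := by
        intro c hc
        rcases pv_kids_bound HP hc with ⟨_, h1, _⟩
        have hdc := (pv_depth_child HP hv hc).2
        exact ⟨by omega, by intro hcv; rw [hcv] at hdc; omega⟩
      rcases pv_inner_fold (pvKids p v) s0 v hcs hv.1.1 (by rw [hlens0]; exact hv.1.2) with ⟨hl2, hv2, hw2⟩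
      set sz2 := (pvKids p v).foldl
        (fun s c => PySem.List.pySetD s v (PySem.List.pyGetD s v 0 + PySem.List.pyGetD s c 0)) s0 with hsz2
      have hlen2 : sz2.length = pvN p := by rw [hsz2, hl2, hlens0]
      have hsz2v : PySem.List.pyGetD sz2 v 0 = pvSize p v := by
        rw [hsz2, hv2, hgs0 v hv.1.1, if_pos rfl]
        have hmap : ((pvKids p v).map (fun c => PySem.List.pyGetD s0 c 0))
            = (pvKids p v).map (pvSize p) := by
          apply List.map_congr_left
          intro c hc
          rcases hcs c hc with ⟨hc0, hcv⟩
          rw [hgs0 c hc0, if_neg hcv, hpt1 c hc0, if_pos ?_]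
          · simp only [List.mem_flatten, List.mem_map]
            exact ⟨pvTour p c, ⟨c, hc, rfl⟩, pv_mem_tour_self HP (hKg c hc)⟩
        rw [hmap, pv_size_eq HP hv]
      have hsz2w : ∀ w, 0 ≤ w → w ≠ v → PySem.List.pyGetD sz2 w 0 = PySem.List.pyGetD sz1 w 0 := by
        intro w hw0 hwv
        rw [hsz2, hw2 w hw0 hwv, hgs0 w hw0, if_neg hwv]
      rcases IH (2 * ((vs'.map (pvTour p)).flatten).length + f) (by omega) vs' f st
          ((seq ++ [v]) ++ ((pvKids p v).map (pvTour p)).flatten) sz2 rfl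
          (fun w hw => hg w (List.mem_cons_of_mem _ hw)) hlen2 with ⟨sz3, heq3, hlen3, hpt3⟩
      rw [heq3]
      refine ⟨sz3, ?_, hlen3, ?_⟩
      · congr 1
        simp [htv, List.append_assoc]
      · intro w hw0
        rw [hpt3 w hw0]
        simp only [List.flatten_cons, List.mem_append, htv, List.mem_cons]
        by_cases hT' : w ∈ (vs'.map (pvTour p)).flatten
        · simp [hT']
        · rw [if_neg hT']
          by_cases hwv : w = v
          · subst hwv
            rw [hsz2v, if_pos (by left; left; rfl)]
          · rw [hsz2w w hw0 hwv, hpt1 w hw0]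
            by_cases htl : w ∈ ((pvKids p v).map (pvTour p)).flatten
            · rw [if_pos htl, if_pos (by simp [htl, hT', hwv])]
            · rw [if_neg htl, if_neg (by simp [htl, hT', hwv])]

lemma pv_foldl_congr {α β : Type} (l : List α) :
    ∀ (f g : β → α → β) (init : β), (∀ acc, ∀ x ∈ l, f acc x = g acc x) →
      l.foldl f init = l.foldl g init := by
  induction l with
  | nil => intro f g init _; rfl
  | cons x l IH =>
    intro f g init h
    simp only [List.foldl_cons]
    rw [h init x List.mem_cons_self]
    exact IH f g _ (fun acc y hy => h acc y (List.mem_cons_of_mem _ hy))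

-- A's range(len(u)) query loop is B's zip loop
lemma pv_zip_fold {β : Type} (g : List β → Int → Int → List β) :
    ∀ (u k : List Int) (init : List β), u.length ≤ k.length →
      (PySem.List.pyRange 0 (u.length : Int) 1).foldl
          (fun acc i => g acc (PySem.List.pyGetD u i 0) (PySem.List.pyGetD k i 0)) init
        = (u.zip k).foldl (fun acc vk => g acc vk.1 vk.2) init := by
  intro u
  induction u with
  | nil => intro k init _; simp
  | cons a u' IH =>
    intro k init hlen
    rcases k with _ | ⟨b, k'⟩
    · simp at hlen
    · rw [PySem.List.pyRange_one]
      have h1 : ((u'.length + 1 : Int) - 0).toNat = u'.length + 1 := by omega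
      simp only [List.length_cons, Nat.cast_add, Nat.cast_one]
      rw [show ((u'.length : Int) + 1 - 0).toNat = u'.length + 1 from by omega]
      rw [List.range_succ_eq_map]
      simp only [List.map_cons, List.foldl_cons, List.map_map]
      rw [List.foldl_map]
      have hstep : ∀ (acc : List β) (j : Nat), j < u'.length →
          g acc (PySem.List.pyGetD (a :: u') ((0 : Int) + ((j + 1 : Nat) : Int)) 0)
            (PySem.List.pyGetD (b :: k') ((0 : Int) + ((j + 1 : Nat) : Int)) 0)
          = g acc (PySem.List.pyGetD u' ((0 : Int) + (j : Int)) 0)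
              (PySem.List.pyGetD k' ((0 : Int) + (j : Int)) 0) := by
        intro acc j hj
        have e1 : (0 : Int) + ((j + 1 : Nat) : Int) = ((j + 1 : Nat) : Int) := by omega
        have e2 : (0 : Int) + ((j : Nat) : Int) = ((j : Nat) : Int) := by omega
        rw [e1, e2, PySem.List.pyGetD_natCast, PySem.List.pyGetD_natCast,
          PySem.List.pyGetD_natCast, PySem.List.pyGetD_natCast]
        simp
      have hlen' : u'.length ≤ k'.length := by simpa using hlen
      have hIH := IH k' (g init a b) hlen'
      rw [PySem.List.pyRange_one, show ((u'.length : Int) - 0).toNat = u'.length from by omega,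
          List.foldl_map] at hIH
      rw [List.zip_cons_cons, List.foldl_cons]
      simp only [Nat.cast_zero, add_zero, PySem.List.pyGetD_zero_cons]
      refine Eq.trans (pv_foldl_congr (List.range u'.length) _ _ _
        (fun acc j hj => hstep acc j (List.mem_range.1 hj))) ?_
      simpa using hIH

-- the query loop builds the same strings whether ints are collected first (A) or not (B)
lemma pv_fold_map_toStr {β : Type} (h : β → Int) :
    ∀ (L : List β) (init : List Int),
      (L.foldl (fun acc x => acc ++ [h x]) init).map PySem.Int.toStr
        = L.foldl (fun acc x => acc ++ [PySem.Int.toStr (h x)]) (init.map PySem.Int.toStr) := by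
  intro L
  induction L with
  | nil => intro init; simp
  | cons x L IH =>
    intro init
    simp only [List.foldl_cons]
    rw [IH]
    simp

-- ===== B-side: levels, sizes by level, arithmetic positions =====

-- a node ≥ 1 is a child of its (wrapped) parent
lemma pv_mem_kids_par {p : List Int} {w : Int} (hg : pvGood p w) (h1 : 1 ≤ w) :
    w ∈ pvKids p (pvPar p w) := by
  have hi : (w - 1).toNat < p.length := by
    rcases hg with ⟨_, h2⟩; simp only [pvN] at h2; omega
  have hcast : (((w - 1).toNat : Nat) : Int) = w - 1 := by omega
  have hpar : pvPar p w = pvWrap (pvN p) (p[(w - 1).toNat] - 1) := by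
    simp only [pvPar, if_neg (by omega : ¬ w ≤ 0)]
    conv_lhs => rw [← hcast, PySem.List.pyGetD_natCast, List.getD_eq_getElem _ _ hi]
  exact pv_mem_kids.2 ⟨(w - 1).toNat, hi, hpar.symm, by omega⟩

lemma pv_depth_zero (p : List Int) : pvDepth p 0 = 0 := by
  simp [pvDepth, pvN, pvD]

lemma pv_eq_zero_of_depth_zero {p : List Int} {w : Int} (hw : pvReach p w)
    (h : pvDepth p w = 0) : w = 0 := by
  have h2 := (pv_depth_hit hw).1
  rw [h] at h2
  simpa [pvParIter] using h2

-- the reachable nodes grouped by depth (B's BFS levels)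
def pvLev (p : List Int) : Nat → List Int
  | 0 => [0]
  | j + 1 => (pvLev p j).flatMap (pvKids p)

lemma pv_lev_mem1 {p : List Int} (HP : pvHP p) :
    ∀ (j : Nat) (w : Int), w ∈ pvLev p j → pvReach p w ∧ pvDepth p w = j := by
  intro j
  induction j with
  | zero =>
    intro w hw
    rcases List.mem_singleton.1 hw with rfl
    exact ⟨pv_reach_zero p, pv_depth_zero p⟩
  | succ j IH =>
    intro w hw
    rcases List.mem_flatMap.1 hw with ⟨v, hv, hwk⟩
    rcases IH v hv with ⟨hrv, hdv⟩
    rcases pv_depth_child HP hrv hwk with ⟨hrw, hdw⟩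
    exact ⟨hrw, by omega⟩

lemma pv_lev_mem2 {p : List Int} (HP : pvHP p) :
    ∀ (j : Nat) (w : Int), pvReach p w → pvDepth p w = j → w ∈ pvLev p j := by
  intro j
  induction j with
  | zero =>
    intro w hw hd
    rw [pv_eq_zero_of_depth_zero hw hd]
    exact List.mem_singleton.2 rfl
  | succ j IH =>
    intro w hw hd
    have hw0 : w ≠ 0 := by
      intro h; subst h; rw [pv_depth_zero p] at hd; omega
    have h1 : 1 ≤ w := by rcases hw.1 with ⟨h0, _⟩; omega
    have hiter : pvParIter p 1 w = pvPar p w := rfl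
    have htg : pvGood p (pvPar p w) := pv_par_good HP hw.1
    have htr : pvReach p (pvPar p w) ∧ pvDepth p (pvPar p w) = j := by
      by_cases h1t : 1 ≤ pvPar p w
      · rcases pv_anc_depth HP hw hiter h1t with ⟨hle, hrt, hdt⟩
        exact ⟨hrt, by omega⟩
      · have ht0 : pvPar p w = 0 := by rcases htg with ⟨a, b⟩; omega
        have hhit : pvParIter p 1 w = 0 := by rw [hiter, ht0]
        have hnd : ¬ (1 < pvDepth p w) := fun hlt => pv_depth_min hlt hhit
        have hj0 : j = 0 := by omega
        rw [ht0, hj0]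
        exact ⟨pv_reach_zero p, pv_depth_zero p⟩
    exact List.mem_flatMap.2 ⟨pvPar p w, IH _ htr.1 htr.2, pv_mem_kids_par hw.1 h1⟩

lemma pv_lev_empty_of_ge {p : List Int} (HP : pvHP p) {j : Nat} (hj : pvN p ≤ j) :
    pvLev p j = [] := by
  rw [List.eq_nil_iff_forall_not_mem]
  intro w hw
  rcases pv_lev_mem1 HP j w hw with ⟨hr, hd⟩
  have := pv_depth_lt hr
  omega

lemma pv_lev_ne_nil {p : List Int} (HP : pvHP p) {w : Int} (hw : pvReach p w)
    {j : Nat} (hj : j ≤ pvDepth p w) : pvLev p j ≠ [] := by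
  rcases Nat.eq_zero_or_pos j with rfl | hjpos
  · simp [pvLev]
  · have htne : pvParIter p (pvDepth p w - j) w ≠ 0 := pv_depth_min (by omega)
    have htg : pvGood p (pvParIter p (pvDepth p w - j) w) := pv_parIter_good HP _ _ hw.1
    have h1t : 1 ≤ pvParIter p (pvDepth p w - j) w := by rcases htg with ⟨a, _⟩; omega
    rcases pv_anc_depth HP hw rfl h1t with ⟨_, hrt, hdt⟩
    have hmem : pvParIter p (pvDepth p w - j) w ∈ pvLev p j :=
      pv_lev_mem2 HP j _ hrt (by omega)
    intro hnil
    rw [hnil] at hmem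
    exact absurd hmem (List.not_mem_nil)

-- the finite list of nonempty levels (what B's while loop produces)
def pvLevList (p : List Int) (j : Nat) : List (List Int) :=
  if pvN p ≤ j ∨ pvLev p j = [] then [] else pvLev p j :: pvLevList p (j + 1)
termination_by pvN p - j
decreasing_by
  rename_i h
  simp only [not_or] at h
  omega

lemma pv_levelsB_eq {p : List Int} (HP : pvHP p) (kd : List (List Int))
    (hkd : ∀ v, pvGood p v → PySem.List.pyGetD kd v [] = pvKids p v) :
    ∀ (fuel j : Nat), pvN p ≤ j + fuel → solveLevelsB kd fuel (pvLev p j) = pvLevList p j := by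
  intro fuel
  induction fuel with
  | zero =>
    intro j hj
    rw [pvLevList, if_pos (Or.inl (by omega))]
    rfl
  | succ fuel IH =>
    intro j hj
    by_cases hnil : pvLev p j = []
    · rw [pvLevList, if_pos (Or.inr hnil), hnil]
      simp [solveLevelsB]
    · have hjlt : j < pvN p := by
        by_contra hge
        exact hnil (pv_lev_empty_of_ge HP (by omega))
      rw [pvLevList, if_neg (not_or.2 ⟨by omega, hnil⟩)]
      simp only [solveLevelsB, if_neg hnil]
      congr 1
      have hnext : (pvLev p j).foldl (fun nxt v => nxt ++ PySem.List.pyGetD kd v []) []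
          = pvLev p (j + 1) := by
        rw [PySem.List.foldl_append_eq_flatMap, List.nil_append]
        exact List.flatMap_congr (fun v hv => hkd v (pv_lev_mem1 HP j v hv).1.1)
      rw [hnext]
      exact IH (j + 1) (by omega)

-- B's per-level size pass
lemma pv_size_lev {p : List Int} (HP : pvHP p) (kd : List (List Int))
    (hkd : ∀ v, pvGood p v → PySem.List.pyGetD kd v [] = pvKids p v) (j : Nat) :
    ∀ (lev : List Int) (sz : List Int),
      (∀ v ∈ lev, pvReach p v ∧ pvDepth p v = j) → sz.length = pvN p →
      (∀ c, 0 ≤ c → pvReach p c → pvDepth p c = j + 1 → PySem.List.pyGetD sz c 0 = pvSize p c) →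
      ((lev.foldl (fun sz v => PySem.List.pySetD sz v
          (1 + ((PySem.List.pyGetD kd v []).map (fun c => PySem.List.pyGetD sz c 0)).sum)) sz).length = pvN p ∧
       ∀ w, 0 ≤ w → PySem.List.pyGetD (lev.foldl (fun sz v => PySem.List.pySetD sz v
          (1 + ((PySem.List.pyGetD kd v []).map (fun c => PySem.List.pyGetD sz c 0)).sum)) sz) w 0
         = if w ∈ lev then pvSize p w else PySem.List.pyGetD sz w 0) := by
  intro lev
  induction lev with
  | nil =>
    intro sz _ hlen _
    exact ⟨hlen, fun w _ => by simp⟩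
  | cons v lev' IH =>
    intro sz hmem hlen hdeep
    rcases hmem v List.mem_cons_self with ⟨hrv, hdv⟩
    have hgv := hrv.1
    have hval : 1 + ((PySem.List.pyGetD kd v []).map (fun c => PySem.List.pyGetD sz c 0)).sum
        = pvSize p v := by
      rw [hkd v hgv]
      have hmap : (pvKids p v).map (fun c => PySem.List.pyGetD sz c 0)
          = (pvKids p v).map (pvSize p) := by
        apply List.map_congr_left
        intro c hc
        rcases pv_depth_child HP hrv hc with ⟨hrc, hdc⟩
        exact hdeep c (by rcases pv_kids_bound HP hc with ⟨_, hb1, _⟩; omega) hrc (by omega)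
      rw [hmap, ← pv_size_eq HP hrv]
    simp only [List.foldl_cons]
    rw [hval]
    have hlen1 : (PySem.List.pySetD sz v (pvSize p v)).length = pvN p := by
      rw [pv_len_setD, hlen]
    have hg1 : ∀ w, 0 ≤ w → PySem.List.pyGetD (PySem.List.pySetD sz v (pvSize p v)) w 0
        = if w = v then pvSize p v else PySem.List.pyGetD sz w 0 := by
      intro w hw
      exact pv_getD_setD _ _ _ _ _ hgv.1 (by rw [hlen]; exact hgv.2) hw
    rcases IH (PySem.List.pySetD sz v (pvSize p v))
        (fun x hx => hmem x (List.mem_cons_of_mem _ hx)) hlen1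
        (fun c hc0 hrc hdc => by
          rw [hg1 c hc0, if_neg (by intro h; subst h; omega), hdeep c hc0 hrc hdc])
      with ⟨hL, hG⟩
    refine ⟨hL, ?_⟩
    intro w hw
    rw [hG w hw]
    by_cases hwl : w ∈ lev'
    · rw [if_pos hwl, if_pos (List.mem_cons_of_mem _ hwl)]
    · rw [if_neg hwl, hg1 w hw]
      by_cases hwv : w = v
      · subst hwv; rw [if_pos rfl, if_pos List.mem_cons_self]
      · rw [if_neg hwv, if_neg (by simp [hwv, hwl])]

-- B's full size pass: the levels processed deepest first via foldl over the reversed list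
lemma pv_size_levList {p : List Int} (HP : pvHP p) (kd : List (List Int))
    (hkd : ∀ v, pvGood p v → PySem.List.pyGetD kd v [] = pvKids p v) :
    ∀ (m j : Nat), pvN p - j ≤ m →
      (((pvLevList p j).reverse.foldl (fun sz lev => lev.foldl (fun sz v => PySem.List.pySetD sz v
          (1 + ((PySem.List.pyGetD kd v []).map (fun c => PySem.List.pyGetD sz c 0)).sum)) sz)
        (List.replicate (pvN p) (0 : Int))).length = pvN p ∧
       ∀ w, 0 ≤ w →
         ((pvReach p w ∧ j ≤ pvDepth p w →
           PySem.List.pyGetD ((pvLevList p j).reverse.foldl (fun sz lev => lev.foldl (fun sz v => PySem.List.pySetD sz v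
            (1 + ((PySem.List.pyGetD kd v []).map (fun c => PySem.List.pyGetD sz c 0)).sum)) sz)
            (List.replicate (pvN p) (0 : Int))) w 0 = pvSize p w) ∧
          (¬ (pvReach p w ∧ j ≤ pvDepth p w) →
           PySem.List.pyGetD ((pvLevList p j).reverse.foldl (fun sz lev => lev.foldl (fun sz v => PySem.List.pySetD sz v
            (1 + ((PySem.List.pyGetD kd v []).map (fun c => PySem.List.pyGetD sz c 0)).sum)) sz)
            (List.replicate (pvN p) (0 : Int))) w 0 = 0))) := by
  intro m
  induction m with
  | zero =>
    intro j hj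
    have hge : pvN p ≤ j := by omega
    rw [pvLevList, if_pos (Or.inl hge)]
    refine ⟨by simp, ?_⟩
    intro w hw
    rw [List.reverse_nil, List.foldl_nil]
    constructor
    · rintro ⟨hr, hle⟩
      have := pv_depth_lt hr
      omega
    · intro _
      exact pv_getD_replicate _ _
  | succ m IH =>
    intro j hj
    rw [pvLevList]
    split_ifs with hcond
    · refine ⟨by simp, ?_⟩
      intro w hw
      rw [List.reverse_nil, List.foldl_nil]
      constructor
      · rintro ⟨hr, hle⟩
        rcases hcond with hge | hnil
        · have := pv_depth_lt hr
          omega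
        · exact absurd hnil (pv_lev_ne_nil HP hr hle)
      · intro _
        exact pv_getD_replicate _ _
    · have hjlt : j < pvN p := by
        by_contra hge
        exact hcond (Or.inl (by omega))
      rcases IH (j + 1) (by omega) with ⟨hdlen, hdget⟩
      rw [List.reverse_cons, List.foldl_append, List.foldl_cons, List.foldl_nil]
      rcases pv_size_lev HP kd hkd j (pvLev p j) _
          (fun v hv => pv_lev_mem1 HP j v hv) hdlen
          (fun c hc0 hrc hdc => (hdget c hc0).1 ⟨hrc, by omega⟩)
        with ⟨hL, hG⟩
      refine ⟨hL, ?_⟩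
      intro w hw
      rw [hG w hw]
      constructor
      · rintro ⟨hr, hle⟩
        rcases Nat.eq_or_lt_of_le hle with heq | hlt
        · rw [if_pos (pv_lev_mem2 HP j w hr heq.symm)]
        · rw [if_neg (fun hmem => by have := (pv_lev_mem1 HP j w hmem).2; omega)]
          exact (hdget w hw).1 ⟨hr, by omega⟩
      · intro hnot
        rw [if_neg (fun hmem => by
            rcases pv_lev_mem1 HP j w hmem with ⟨hr, hd⟩
            exact hnot ⟨hr, by omega⟩)]
        exact (hdget w hw).2 (fun h => hnot ⟨h.1, by omega⟩)

-- reachability = membership in the preorder tour of the root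
lemma pv_mem_tour_iter {p : List Int} (HP : pvHP p) :
    ∀ (j : Nat) (w : Int), pvReach p w → w ∈ pvTour p (pvParIter p j w) := by
  intro j
  induction j with
  | zero => intro w hw; exact pv_mem_tour_self HP hw
  | succ j IH =>
    intro w hw
    have hstep : pvParIter p (j + 1) w = pvPar p (pvParIter p j w) := by
      rw [pv_parIter_add 1 j w]; rfl
    have htg : pvGood p (pvParIter p j w) := pv_parIter_good HP j w hw.1
    by_cases h1t : 1 ≤ pvParIter p j w
    · have hqr : pvReach p (pvPar p (pvParIter p j w)) := by
        by_cases h1q : 1 ≤ pvPar p (pvParIter p j w)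
        · exact (pv_anc_depth HP hw hstep h1q).2.1
        · have hq0 : pvPar p (pvParIter p j w) = 0 := by
            rcases pv_par_good HP htg with ⟨a, _⟩; omega
          rw [hq0]; exact pv_reach_zero p
      have hmem : pvParIter p j w ∈ pvKids p (pvPar p (pvParIter p j w)) :=
        pv_mem_kids_par htg h1t
      rw [hstep, pv_tour_unfold HP hqr]
      exact List.mem_cons_of_mem _ (List.mem_flatten.2
        ⟨pvTour p (pvParIter p j w), List.mem_map.2 ⟨_, hmem, rfl⟩, IH w hw⟩)
    · have ht0 : pvParIter p j w = 0 := by rcases htg with ⟨a, _⟩; omega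
      have hq : pvParIter p (j + 1) w = pvParIter p j w := by
        rw [hstep, ht0]; simp [pvPar]
      rw [hq]
      exact IH w hw

lemma pv_mem_tour0_iff {p : List Int} (HP : pvHP p) {w : Int} :
    w ∈ pvTour p 0 ↔ pvReach p w := by
  constructor
  · intro hw
    exact (pv_mem_pre_bound HP (pvN p) 0 w (pv_reach_zero p) hw).1
  · intro hw
    have h := pv_mem_tour_iter HP (pvDepth p w) w hw
    rwa [(pv_depth_hit hw).1] at h

-- the tour of a reachable node is a contiguous block of the root tour
lemma pv_tour_split_iter {p : List Int} (HP : pvHP p) :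
    ∀ (j : Nat) (w : Int), pvReach p w →
      ∃ X Y, pvTour p (pvParIter p j w) = X ++ pvTour p w ++ Y := by
  intro j
  induction j with
  | zero => intro w hw; exact ⟨[], [], by simp [pvParIter]⟩
  | succ j IH =>
    intro w hw
    have hstep : pvParIter p (j + 1) w = pvPar p (pvParIter p j w) := by
      rw [pv_parIter_add 1 j w]; rfl
    have htg : pvGood p (pvParIter p j w) := pv_parIter_good HP j w hw.1
    rcases IH w hw with ⟨X, Y, hXY⟩
    by_cases h1t : 1 ≤ pvParIter p j w
    · have hqr : pvReach p (pvPar p (pvParIter p j w)) := by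
        by_cases h1q : 1 ≤ pvPar p (pvParIter p j w)
        · exact (pv_anc_depth HP hw hstep h1q).2.1
        · have hq0 : pvPar p (pvParIter p j w) = 0 := by
            rcases pv_par_good HP htg with ⟨a, _⟩; omega
          rw [hq0]; exact pv_reach_zero p
      have hmem : pvParIter p j w ∈ pvKids p (pvPar p (pvParIter p j w)) :=
        pv_mem_kids_par htg h1t
      rcases List.mem_iff_append.mp hmem with ⟨K1, K2, hK⟩
      rw [hstep, pv_tour_unfold HP hqr, hK]
      refine ⟨pvPar p (pvParIter p j w) :: ((K1.map (pvTour p)).flatten ++ X),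
              Y ++ (K2.map (pvTour p)).flatten, ?_⟩
      simp only [List.map_append, List.map_cons, List.flatten_append, List.flatten_cons]
      rw [hXY]
      simp [List.append_assoc]
    · have ht0 : pvParIter p j w = 0 := by rcases htg with ⟨a, _⟩; omega
      have hq : pvParIter p (j + 1) w = pvParIter p j w := by
        rw [hstep, ht0]; simp [pvPar]
      rw [hq]
      exact ⟨X, Y, hXY⟩

-- preorder index of a node (what B computes arithmetically)
def pvIdx (p : List Int) (w : Int) : Int := ((pvTour p 0).idxOf w : Int)

lemma pv_idx_prefix {p : List Int} (HP : pvHP p) {X Z : List Int} {w : Int}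
    (h : pvTour p 0 = X ++ w :: Z) : pvIdx p w = (X.length : Int) := by
  have hnd : (pvTour p 0).Nodup := pv_nodup_pre HP (pvN p) 0 (pv_reach_zero p)
  have hwX : w ∉ X := by
    rw [h] at hnd
    intro hmem
    exact (List.disjoint_of_nodup_append hnd) hmem List.mem_cons_self
  rw [pvIdx, h, List.idxOf_append_of_notMem hwX]
  simp

lemma pv_idx_zero {p : List Int} (HP : pvHP p) : pvIdx p 0 = 0 := by
  have h2 : pvTour p 0 = [] ++ 0 :: ((pvKids p 0).map (pvTour p)).flatten := by
    simpa using pv_tour_unfold HP (pv_reach_zero p)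
  rw [pv_idx_prefix HP h2]
  simp

lemma pv_idx_split {p : List Int} (HP : pvHP p) {v : Int} (hv : pvReach p v) :
    ∃ X Y, pvTour p 0 = X ++ pvTour p v ++ Y ∧ pvIdx p v = (X.length : Int) := by
  rcases pv_tour_split_iter HP (pvDepth p v) v hv with ⟨X, Y, hXY⟩
  rw [(pv_depth_hit hv).1] at hXY
  refine ⟨X, Y, hXY, ?_⟩
  have h2 : pvTour p 0 = X ++ v :: (((pvKids p v).map (pvTour p)).flatten ++ Y) := by
    rw [hXY, pv_tour_unfold HP hv]; simp
  exact pv_idx_prefix HP h2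

lemma pv_idx_kid {p : List Int} (HP : pvHP p) {v : Int} (hv : pvReach p v)
    {K1 : List Int} {c : Int} {K2 : List Int} (hk : pvKids p v = K1 ++ c :: K2) :
    pvIdx p c = pvIdx p v + 1 + (K1.map (pvSize p)).sum := by
  rcases pv_idx_split HP hv with ⟨X, Y, hXY, hXlen⟩
  have hrc : pvReach p c :=
    (pv_depth_child HP hv (by rw [hk]; exact List.mem_append_right _ List.mem_cons_self)).1
  have h2 : pvTour p 0 = (X ++ v :: (K1.map (pvTour p)).flatten) ++ c ::
      (((pvKids p c).map (pvTour p)).flatten ++ ((K2.map (pvTour p)).flatten ++ Y)) := by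
    rw [hXY, pv_tour_unfold HP hv, hk]
    simp only [List.map_append, List.map_cons, List.flatten_append, List.flatten_cons]
    rw [pv_tour_unfold HP hrc]
    simp [List.append_assoc]
  rw [pv_idx_prefix HP h2, hXlen]
  have hsum : ((K1.map (pvTour p)).flatten.length : Int) = (K1.map (pvSize p)).sum := by
    rw [List.length_flatten, List.map_map]
    push_cast [Nat.cast_list_sum]
    simp only [List.map_map]
    rfl
  simp only [List.length_append, List.length_cons]
  push_cast
  omega

lemma pv_idx_getElem {p : List Int} (HP : pvHP p) {i : Nat} (hi : i < (pvTour p 0).length) :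
    pvIdx p ((pvTour p 0)[i]) = (i : Int) := by
  have hnd := pv_nodup_pre HP (pvN p) 0 (pv_reach_zero p)
  have hmem : (pvTour p 0)[i] ∈ pvTour p 0 := List.getElem_mem hi
  have h1 : (pvTour p 0).idxOf ((pvTour p 0)[i]) < (pvTour p 0).length :=
    List.idxOf_lt_length_of_mem hmem
  have h2 : (pvTour p 0)[(pvTour p 0).idxOf ((pvTour p 0)[i])] = (pvTour p 0)[i] :=
    List.getElem_idxOf h1
  have h3 := (List.Nodup.getElem_inj_iff hnd).mp h2
  rw [pvIdx, h3]

lemma pv_idx_lt {p : List Int} {w : Int} (hw : w ∈ pvTour p 0) :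
    0 ≤ pvIdx p w ∧ pvIdx p w < ((pvTour p 0).length : Int) := by
  have h := List.idxOf_lt_length_of_mem hw
  exact ⟨by simp [pvIdx], by simp only [pvIdx]; exact_mod_cast h⟩

lemma pv_getElem_idx {p : List Int} {w : Int} (hw : w ∈ pvTour p 0) :
    PySem.List.pyGetD (pvTour p 0) (pvIdx p w) 0 = w := by
  have h := List.idxOf_lt_length_of_mem hw
  rw [pvIdx, PySem.List.pyGetD_natCast, List.getD_eq_getElem _ _ h]
  exact List.getElem_idxOf h

-- B's inner position loop over the (sorted) children of one node
lemma pv_pos_kids {p : List Int} (HP : pvHP p) {v : Int} (hv : pvReach p v)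
    (size : List Int)
    (hsz : ∀ c, 0 ≤ c → pvReach p c → PySem.List.pyGetD size c 0 = pvSize p c) :
    ∀ (K2 K1 : List Int), pvKids p v = K1 ++ K2 → ∀ (d : PySem.Dict Int Int) (q : Int),
      q = pvIdx p v + 1 + (K1.map (pvSize p)).sum →
      ((∀ w, (K2.foldl (fun dq c => (dq.1.insert c dq.2, dq.2 + PySem.List.pyGetD size c 0)) (d, q)).1.getD w 0
          = if w ∈ K2 then pvIdx p w else d.getD w 0) ∧
       (∀ w, w ∈ (K2.foldl (fun dq c => (dq.1.insert c dq.2, dq.2 + PySem.List.pyGetD size c 0)) (d, q)).1.keys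
          ↔ w ∈ K2 ∨ w ∈ d.keys) ∧
       (d.keys.Nodup →
         (K2.foldl (fun dq c => (dq.1.insert c dq.2, dq.2 + PySem.List.pyGetD size c 0)) (d, q)).1.keys.Nodup)) := by
  intro K2
  induction K2 with
  | nil =>
    intro K1 hk d q hq
    exact ⟨fun w => by simp, fun w => by simp, fun h => h⟩
  | cons c K2' IH =>
    intro K1 hk d q hq
    have hmemc : c ∈ pvKids p v := by
      rw [hk]; exact List.mem_append_right _ List.mem_cons_self
    have hrc : pvReach p c := (pv_depth_child HP hv hmemc).1
    have hc0 : 0 ≤ c := by rcases pv_kids_bound HP hmemc with ⟨_, hb1, _⟩; omega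
    have hqc : q = pvIdx p c := by
      rw [hq, pv_idx_kid HP hv hk]
    have hnd : (pvKids p v).Nodup := (pv_kids_pairwise (p := p) v).imp (fun h => ne_of_lt h)
    have hcK2 : c ∉ K2' := by
      rw [hk] at hnd
      have hnd2 := List.Nodup.of_append_right hnd
      exact (List.nodup_cons.1 hnd2).1
    have hk' : pvKids p v = (K1 ++ [c]) ++ K2' := by rw [hk]; simp
    have hq' : q + PySem.List.pyGetD size c 0 = pvIdx p v + 1 + ((K1 ++ [c]).map (pvSize p)).sum := by
      rw [hsz c hc0 hrc, hq]
      simp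
      ring
    rcases IH (K1 ++ [c]) hk' (d.insert c q) (q + PySem.List.pyGetD size c 0) hq'
      with ⟨hG, hK, hN⟩
    simp only [List.foldl_cons]
    refine ⟨?_, ?_, ?_⟩
    · intro w
      rw [hG w]
      by_cases hw2 : w ∈ K2'
      · rw [if_pos hw2, if_pos (List.mem_cons_of_mem _ hw2)]
      · rw [if_neg hw2]
        by_cases hwc : w = c
        · subst hwc
          rw [if_pos List.mem_cons_self, PySem.Dict.getD_insert_self, hqc]
        · rw [if_neg (by simp [hwc, hw2]), PySem.Dict.getD_insert, if_neg hwc]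
    · intro w
      rw [hK w, PySem.Dict.mem_keys_insert]
      simp only [List.mem_cons]
      tauto
    · intro hdn
      exact hN (PySem.Dict.nodup_keys_insert d c q hdn)

-- B's position loop over one level
lemma pv_pos_lev {p : List Int} (HP : pvHP p) (kd : List (List Int))
    (hkd : ∀ v, pvGood p v → PySem.List.pyGetD kd v [] = pvKids p v)
    (size : List Int)
    (hsz : ∀ c, 0 ≤ c → pvReach p c → PySem.List.pyGetD size c 0 = pvSize p c)
    (j : Nat) :
    ∀ (lev : List Int) (d : PySem.Dict Int Int) (P : Int → Bool),
      (∀ v ∈ lev, pvReach p v ∧ pvDepth p v = j) →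
      (∀ v ∈ lev, P v = true) →
      (∀ w, d.getD w 0 = if P w then pvIdx p w else 0) →
      (∀ w, w ∈ d.keys ↔ P w = true) →
      d.keys.Nodup →
      ((∀ w, (lev.foldl (fun d v =>
          ((PySem.List.pyGetD kd v []).foldl
            (fun dq c => (dq.1.insert c dq.2, dq.2 + PySem.List.pyGetD size c 0))
            (d, d.getD v 0 + 1)).1) d).getD w 0
         = if (P w || decide (w ∈ lev.flatMap (pvKids p))) then pvIdx p w else 0) ∧
       (∀ w, w ∈ (lev.foldl (fun d v =>
          ((PySem.List.pyGetD kd v []).foldl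
            (fun dq c => (dq.1.insert c dq.2, dq.2 + PySem.List.pyGetD size c 0))
            (d, d.getD v 0 + 1)).1) d).keys
         ↔ (P w || decide (w ∈ lev.flatMap (pvKids p))) = true) ∧
       (lev.foldl (fun d v =>
          ((PySem.List.pyGetD kd v []).foldl
            (fun dq c => (dq.1.insert c dq.2, dq.2 + PySem.List.pyGetD size c 0))
            (d, d.getD v 0 + 1)).1) d).keys.Nodup) := by
  intro lev
  induction lev with
  | nil =>
    intro d P _ _ hG hK hN
    refine ⟨fun w => by simpa using hG w, fun w => by simpa using hK w, hN⟩
  | cons v lev' IH =>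
    intro d P hmem hP hG hK hN
    rcases hmem v List.mem_cons_self with ⟨hrv, hdv⟩
    have hdv0 : d.getD v 0 = pvIdx p v := by
      rw [hG v, if_pos (hP v List.mem_cons_self)]
    simp only [List.foldl_cons]
    have hkdv : PySem.List.pyGetD kd v [] = pvKids p v := hkd v hrv.1
    rw [hkdv, hdv0]
    rcases pv_pos_kids HP hrv size hsz (pvKids p v) [] (by simp) d (pvIdx p v + 1)
        (by simp) with ⟨hG1, hK1, hN1⟩
    rcases IH _ (fun w => P w || decide (w ∈ pvKids p v))
        (fun x hx => hmem x (List.mem_cons_of_mem _ hx))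
        (fun x hx => by dsimp only; rw [hP x (List.mem_cons_of_mem _ hx)]; simp)
        (fun w => by
          dsimp only
          rw [hG1 w]
          by_cases hwk : w ∈ pvKids p v
          · rw [if_pos hwk, if_pos (by simp [hwk])]
          · rw [if_neg hwk, hG w]
            by_cases hPw : P w = true
            · rw [if_pos hPw, if_pos (by simp [hPw])]
            · rw [if_neg hPw, if_neg (by simp [hPw, hwk])])
        (fun w => by dsimp only; rw [hK1 w, hK w]; simp [or_comm])
        (hN1 hN)
      with ⟨hG2, hK2, hN2⟩
    refine ⟨?_, ?_, hN2⟩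
    · intro w
      rw [hG2 w]
      have hcond : ((P w || decide (w ∈ pvKids p v)) || decide (w ∈ lev'.flatMap (pvKids p)))
          = (P w || decide (w ∈ (v :: lev').flatMap (pvKids p))) := by
        simp [List.flatMap_cons, Bool.or_assoc]
      rw [hcond]
    · intro w
      rw [hK2 w]
      have hcond : ((P w || decide (w ∈ pvKids p v)) || decide (w ∈ lev'.flatMap (pvKids p)))
          = (P w || decide (w ∈ (v :: lev').flatMap (pvKids p))) := by
        simp [List.flatMap_cons, Bool.or_assoc]
      rw [hcond]

-- B's full position pass over the level list
lemma pv_pos_levList {p : List Int} (HP : pvHP p) (kd : List (List Int))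
    (hkd : ∀ v, pvGood p v → PySem.List.pyGetD kd v [] = pvKids p v)
    (size : List Int)
    (hsz : ∀ c, 0 ≤ c → pvReach p c → PySem.List.pyGetD size c 0 = pvSize p c) :
    ∀ (m j : Nat), pvN p - j ≤ m → ∀ (d : PySem.Dict Int Int) (P : Int → Bool),
      (∀ w, d.getD w 0 = if P w then pvIdx p w else 0) →
      (∀ w, w ∈ d.keys ↔ P w = true) →
      d.keys.Nodup →
      (∀ w, pvReach p w → pvDepth p w ≤ j → P w = true) →
      (∀ w, P w = true → pvReach p w) →
      ((∀ w, pvReach p w → ((pvLevList p j).foldl (fun d lev => lev.foldl (fun d v =>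
          ((PySem.List.pyGetD kd v []).foldl
            (fun dq c => (dq.1.insert c dq.2, dq.2 + PySem.List.pyGetD size c 0))
            (d, d.getD v 0 + 1)).1) d) d).getD w 0 = pvIdx p w) ∧
       (∀ w, ¬ pvReach p w → ((pvLevList p j).foldl (fun d lev => lev.foldl (fun d v =>
          ((PySem.List.pyGetD kd v []).foldl
            (fun dq c => (dq.1.insert c dq.2, dq.2 + PySem.List.pyGetD size c 0))
            (d, d.getD v 0 + 1)).1) d) d).getD w 0 = 0) ∧
       (∀ w, w ∈ ((pvLevList p j).foldl (fun d lev => lev.foldl (fun d v =>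
          ((PySem.List.pyGetD kd v []).foldl
            (fun dq c => (dq.1.insert c dq.2, dq.2 + PySem.List.pyGetD size c 0))
            (d, d.getD v 0 + 1)).1) d) d).keys ↔ pvReach p w) ∧
       ((pvLevList p j).foldl (fun d lev => lev.foldl (fun d v =>
          ((PySem.List.pyGetD kd v []).foldl
            (fun dq c => (dq.1.insert c dq.2, dq.2 + PySem.List.pyGetD size c 0))
            (d, d.getD v 0 + 1)).1) d) d).keys.Nodup) := by
  intro m
  induction m with
  | zero =>
    intro j hj d P hG hK hN hfull hrev
    have hge : pvN p ≤ j := by omega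
    rw [pvLevList, if_pos (Or.inl hge), List.foldl_nil]
    have hPiff : ∀ w, P w = true ↔ pvReach p w := by
      intro w
      constructor
      · exact hrev w
      · intro hr
        exact hfull w hr (by have := pv_depth_lt hr; omega)
    refine ⟨?_, ?_, ?_, hN⟩
    · intro w hr
      rw [hG w, if_pos ((hPiff w).2 hr)]
    · intro w hr
      rw [hG w, if_neg (fun hPw => hr ((hPiff w).1 hPw))]
    · intro w
      rw [hK w, hPiff w]
  | succ m IH =>
    intro j hj d P hG hK hN hfull hrev
    rw [pvLevList]
    split_ifs with hcond
    · rw [List.foldl_nil]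
      have hPiff : ∀ w, P w = true ↔ pvReach p w := by
        intro w
        constructor
        · exact hrev w
        · intro hr
          rcases hcond with hge | hnil
          · exact hfull w hr (by have := pv_depth_lt hr; omega)
          · by_cases hle : j ≤ pvDepth p w
            · exact absurd hnil (pv_lev_ne_nil HP hr hle)
            · exact hfull w hr (by omega)
      refine ⟨?_, ?_, ?_, hN⟩
      · intro w hr
        rw [hG w, if_pos ((hPiff w).2 hr)]
      · intro w hr
        rw [hG w, if_neg (fun hPw => hr ((hPiff w).1 hPw))]
      · intro w
        rw [hK w, hPiff w]
    · have hjlt : j < pvN p := by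
        by_contra hge
        exact hcond (Or.inl (by omega))
      rw [List.foldl_cons]
      rcases pv_pos_lev HP kd hkd size hsz j (pvLev p j) d P
          (fun v hv => pv_lev_mem1 HP j v hv)
          (fun v hv => hfull v (pv_lev_mem1 HP j v hv).1 (by rw [(pv_lev_mem1 HP j v hv).2]))
          hG hK hN
        with ⟨hG1, hK1, hN1⟩
      exact IH (j + 1) (by omega) _ (fun w => P w || decide (w ∈ (pvLev p j).flatMap (pvKids p)))
        hG1 hK1 hN1
        (fun w hr hd => by
          dsimp only
          rcases Nat.eq_or_lt_of_le hd with heq | hlt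
          · have hm : w ∈ pvLev p (j + 1) := pv_lev_mem2 HP (j + 1) w hr heq
            simp only [pvLev] at hm
            simp [hm]
          · rw [hfull w hr (by omega)]; simp)
        (fun w hPw => by
          dsimp only at hPw
          rcases Bool.or_eq_true_iff.1 hPw with h1 | h1
          · exact hrev w h1
          · have hmem : w ∈ (pvLev p j).flatMap (pvKids p) := of_decide_eq_true h1
            have hm : w ∈ pvLev p (j + 1) := by simpa only [pvLev] using hmem
            exact (pv_lev_mem1 HP (j + 1) w hm).1)

-- A's node_to_index dict: its lookups are the preorder indices
lemma pv_nti_getD {p : List Int} (HP : pvHP p) (w : Int) :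
    (((PySem.List.enumerate (pvTour p 0) 0).foldl (fun d pr => d.insert pr.2 pr.1)
        (PySem.Dict.empty : PySem.Dict Int Int)).getD w 0)
      = if w ∈ pvTour p 0 then pvIdx p w else 0 := by
  have hnd : (pvTour p 0).Nodup := pv_nodup_pre HP (pvN p) 0 (pv_reach_zero p)
  have hmapnd : ((PySem.List.enumerate (pvTour p 0) 0).map (fun pr => pr.2)).Nodup := by
    rw [PySem.List.map_snd_enumerate]; exact hnd
  have hitems := PySem.Dict.items_foldl_insert_fresh (PySem.List.enumerate (pvTour p 0) 0)
      (fun pr => pr.2) (fun pr => pr.1) (PySem.Dict.empty : PySem.Dict Int Int)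
      (fun a _ => by simp [PySem.Dict.contains_empty]) hmapnd
  have hkeys : (((PySem.List.enumerate (pvTour p 0) 0).foldl (fun d pr => d.insert pr.2 pr.1)
      (PySem.Dict.empty : PySem.Dict Int Int)).keys) = pvTour p 0 := by
    simp only [PySem.Dict.keys, hitems]
    simp only [List.map_append, List.map_map, Function.comp_def, PySem.List.map_snd_enumerate]
    have hemp : (PySem.Dict.empty : PySem.Dict Int Int).items = [] := rfl
    rw [hemp, List.map_nil, List.nil_append]
  by_cases hw : w ∈ pvTour p 0
  · rw [if_pos hw]
    have hknd : (((PySem.List.enumerate (pvTour p 0) 0).foldl (fun d pr => d.insert pr.2 pr.1)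
        (PySem.Dict.empty : PySem.Dict Int Int)).keys).Nodup := by
      rw [hkeys]; exact hnd
    have hidx := List.idxOf_lt_length_of_mem hw
    have hpair : ((0 : Int) + ((pvTour p 0).idxOf w : Int), (pvTour p 0)[(pvTour p 0).idxOf w])
        ∈ PySem.List.enumerate (pvTour p 0) 0 :=
      (PySem.List.mem_enumerate_iff _ _ _).2 ⟨(pvTour p 0).idxOf w, hidx, rfl⟩
    rw [List.getElem_idxOf hidx] at hpair
    have hmemitems : (w, (0 : Int) + ((pvTour p 0).idxOf w : Int))
        ∈ (((PySem.List.enumerate (pvTour p 0) 0).foldl (fun d pr => d.insert pr.2 pr.1)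
            (PySem.Dict.empty : PySem.Dict Int Int)).items) := by
      rw [hitems]
      exact List.mem_append_right _ (List.mem_map.2 ⟨_, hpair, rfl⟩)
    rw [PySem.Dict.getD_of_mem_items _ hmemitems hknd 0]
    simp [pvIdx]
  · rw [if_neg hw]
    refine PySem.Dict.getD_of_not_contains _ _ ?_
    rw [Bool.eq_false_iff]
    intro hc
    exact hw (hkeys ▸ (PySem.Dict.contains_iff_mem_keys _ _).1 hc)

-- B's scatter loop: writing each node at its (distinct, in-range) position
lemma pv_scatter :
    ∀ (its : List (Int × Int)) (ord : List Int),
      (∀ q ∈ its, 0 ≤ q.2 ∧ q.2 < (ord.length : Int)) →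
      ((its.map (·.2)).Nodup) →
      ((its.foldl (fun ord vi => PySem.List.pySetD ord vi.2 vi.1) ord).length = ord.length ∧
       (∀ q ∈ its, PySem.List.pyGetD (its.foldl (fun ord vi => PySem.List.pySetD ord vi.2 vi.1) ord) q.2 0 = q.1) ∧
       (∀ i : Int, 0 ≤ i → (∀ q ∈ its, q.2 ≠ i) →
         PySem.List.pyGetD (its.foldl (fun ord vi => PySem.List.pySetD ord vi.2 vi.1) ord) i 0
           = PySem.List.pyGetD ord i 0)) := by
  intro its
  induction its with
  | nil => intro ord _ _; exact ⟨rfl, fun q hq => absurd hq (List.not_mem_nil), fun i _ _ => rfl⟩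
  | cons q its' IH =>
    intro ord hB hnd
    have hq := hB q List.mem_cons_self
    have hlen1 : (PySem.List.pySetD ord q.2 q.1).length = ord.length := pv_len_setD _ _ _
    have hg1 : ∀ i : Int, 0 ≤ i → PySem.List.pyGetD (PySem.List.pySetD ord q.2 q.1) i 0
        = if i = q.2 then q.1 else PySem.List.pyGetD ord i 0 := by
      intro i hi
      exact pv_getD_setD _ _ _ _ _ hq.1 hq.2 hi
    have hq2nd : ∀ r ∈ its', r.2 ≠ q.2 := by
      intro r hr heq
      rcases List.nodup_cons.1 hnd with ⟨hq2, _⟩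
      exact hq2 (List.mem_map.2 ⟨r, hr, heq⟩)
    rcases IH (PySem.List.pySetD ord q.2 q.1)
        (fun r hr => by rw [hlen1]; exact hB r (List.mem_cons_of_mem _ hr))
        ((List.nodup_cons.1 hnd).2)
      with ⟨hL, hG, hU⟩
    simp only [List.foldl_cons]
    refine ⟨by rw [hL, hlen1], ?_, ?_⟩
    · intro r hr
      rcases List.mem_cons.1 hr with rfl | hr'
      · rw [hU r.2 hq.1 (fun s hs => hq2nd s hs), hg1 r.2 hq.1, if_pos rfl]
      · exact hG r hr'
    · intro i hi hne
      rw [hU i hi (fun s hs => hne s (List.mem_cons_of_mem _ hs)),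
          hg1 i hi, if_neg (fun h => hne q List.mem_cons_self h.symm)]

lemma pv_getD_oob (xs : List Int) (i : Int) (hi : (xs.length : Int) ≤ i) :
    PySem.List.pyGetD xs i 0 = 0 := by
  rw [PySem.List.pyGetD_of_none _ _ _ ((PySem.List.pyGet?_eq_none_iff _ _).2
    (by simp [PySem.Raise.InRange]; omega))]

-- the assembly: both ports compute the same child lists, the preorder tour, the same
-- sizes, position dictionaries with the same lookups, and hence the same answers
lemma pv_main (p u k : List Int) (hpre : Pre_solve p u k) : solve p u k = solve_alt p u k := by
  obtain ⟨HP, hlenuk, -⟩ := hpre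
  have hg0 : pvReach p 0 := pv_reach_zero p
  simp only [solve, solve_alt]
  rw [show p.length + 1 = pvN p from rfl]
  -- ===== the shared child-list building loop =====
  have hB : ∀ q ∈ pvLp p,
      -((((List.range (pvN p)).map (fun _ => ([] : List Int))).length : Nat) : Int) ≤ q.1 ∧
      q.1 < (((List.range (pvN p)).map (fun _ => ([] : List Int))).length : Int) := by
    intro q hq
    rcases pv_mem_Lp.1 hq with ⟨i, hi, rfl⟩
    rcases HP i hi with ⟨h1, h2⟩
    simp only [List.length_map, List.length_range, pvN]
    constructor
    · push_cast; omega
    · push_cast; omega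
  obtain ⟨hchlen, hchget⟩ :=
    pv_foldl_setD_append (pvLp p) ((List.range (pvN p)).map (fun _ => ([] : List Int))) hB
  rw [show (PySem.List.enumerate p 0).foldl
        (fun cl ip => PySem.List.pySetD cl (ip.2 - 1) (PySem.List.pyGetD cl (ip.2 - 1) [] ++ [ip.1 + 1]))
        ((List.range (pvN p)).map (fun _ => ([] : List Int)))
      = (pvLp p).foldl (fun cl q => PySem.List.pySetD cl q.1 (PySem.List.pyGetD cl q.1 [] ++ [q.2]))
        ((List.range (pvN p)).map (fun _ => ([] : List Int)))
      from by simp only [pvLp, List.foldl_map]]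
  set CH1 := (pvLp p).foldl (fun cl q => PySem.List.pySetD cl q.1 (PySem.List.pyGetD cl q.1 [] ++ [q.2]))
    ((List.range (pvN p)).map (fun _ => ([] : List Int))) with hCH1
  have hlen0 : ((List.range (pvN p)).map (fun _ => ([] : List Int))).length = pvN p := by
    simp
  have hch1 : ∀ v : Int, 0 ≤ v → PySem.List.pyGetD CH1 v [] = pvKids p v := by
    intro v hv
    rw [hCH1, hchget v hv, pv_getD_map_const, List.nil_append, hlen0]
    rfl
  have hch1len : CH1.length = pvN p := by
    rw [hCH1, hchlen]; simp
  -- ===== A's in-place sorting pass =====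
  set CL := CH1.map (fun l => PySem.List.sorted l (fun x => x) false) with hCL
  have hcl : ∀ v, pvGood p v → PySem.List.pyGetD CL v [] = pvKids p v := by
    intro v hv
    rw [hCL, PySem.List.pyGetD_eq_getElem _ _ hv.1
      (by rw [List.length_map, hch1len]; exact hv.2)]
    rw [List.getElem_map]
    rw [← PySem.List.pyGetD_eq_getElem _ ([] : List Int) hv.1 (by rw [hch1len]; exact hv.2)]
    rw [hch1 v hv.1]
    exact PySem.List.sorted_eq_self_of_pairwise _ _
      ((pv_kids_pairwise (p := p) v).imp (fun h => le_of_lt h))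
  -- ===== A's DFS loop =====
  obtain ⟨szA, hresA, hlenA, hptA⟩ :=
    pv_loopA HP CL hcl (2 * pvN p + 1) [0] (2 * pvN p + 1 - 2 * (pvTour p 0).length) []
      [] (List.replicate (pvN p) 0)
      (by simp only [List.map_cons, List.map_nil, List.flatten_cons, List.flatten_nil,
            List.append_nil]
          have := pv_tour_length_le HP hg0
          omega)
      (by intro v hv; rcases List.mem_singleton.1 hv with rfl; exact hg0)
      (by simp)
  simp only [List.map_cons, List.map_nil, List.flatten_cons, List.flatten_nil,
    List.append_nil, List.nil_append] at hresA hptA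
  rw [pv_loopA_nil] at hresA
  rw [hresA]
  simp only
  have hszA : ∀ w, 0 ≤ w → PySem.List.pyGetD szA w 0
      = if w ∈ pvTour p 0 then pvSize p w else 0 := by
    intro w hw
    rw [hptA w hw, pv_getD_replicate]
  -- ===== B's sorting-by-reassignment pass =====
  have hrange : ∀ x ∈ PySem.List.pyRange 0 (pvN p : Int) 1, 0 ≤ x ∧ x < (CH1.length : Int) := by
    intro x hx
    rcases PySem.List.mem_pyRange_one.1 hx with ⟨h1, h2⟩
    rw [hch1len]
    exact ⟨h1, h2⟩
  obtain ⟨hKBlen, hKBget⟩ := pv_list_sort_getD (PySem.List.pyRange 0 (pvN p : Int) 1) CH1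
    hrange (PySem.List.nodup_pyRange_one _ _)
  set KD := (PySem.List.pyRange 0 (pvN p : Int) 1).foldl
    (fun cl v => PySem.List.pySetD cl v
      (PySem.List.sorted (PySem.List.pyGetD cl v []) (fun x => x) false)) CH1 with hKD
  have hkd : ∀ v, pvGood p v → PySem.List.pyGetD KD v [] = pvKids p v := by
    intro v hv
    rw [hKD, hKBget v hv.1, if_pos (PySem.List.mem_pyRange_one.2 ⟨hv.1, hv.2⟩), hch1 v hv.1]
    exact PySem.List.sorted_eq_self_of_pairwise _ _
      ((pv_kids_pairwise (p := p) v).imp (fun h => le_of_lt h))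
  -- ===== B's BFS levels =====
  have hlevels : solveLevelsB KD (pvN p + 1) [0] = pvLevList p 0 :=
    pv_levelsB_eq HP KD hkd (pvN p + 1) 0 (by omega)
  rw [hlevels]
  -- ===== B's level-by-level size pass =====
  rcases pv_size_levList HP KD hkd (pvN p) 0 (by omega) with ⟨hSZlen, hSZget⟩
  set SZ := (pvLevList p 0).reverse.foldl (fun sz lev => lev.foldl (fun sz v => PySem.List.pySetD sz v
      (1 + ((PySem.List.pyGetD KD v []).map (fun c => PySem.List.pyGetD sz c 0)).sum)) sz)
    (List.replicate (pvN p) (0 : Int)) with hSZ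
  have hsz : ∀ c, 0 ≤ c → pvReach p c → PySem.List.pyGetD SZ c 0 = pvSize p c := by
    intro c h0 hr
    exact (hSZget c h0).1 ⟨hr, Nat.zero_le _⟩
  have hAB : szA = SZ := by
    apply pv_list_ext _ _ (by rw [hlenA, hSZlen])
    intro w hw
    rw [hszA w hw]
    by_cases hr : pvReach p w
    · rw [if_pos ((pv_mem_tour0_iff HP).2 hr), ((hSZget w hw).1 ⟨hr, Nat.zero_le _⟩)]
    · rw [if_neg (fun hm => hr ((pv_mem_tour0_iff HP).1 hm)), (hSZget w hw).2 (fun h => hr h.1)]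
  -- ===== B's arithmetic position pass =====
  rcases pv_pos_levList HP KD hkd SZ hsz (pvN p) 0 (by omega)
      ((PySem.Dict.empty : PySem.Dict Int Int).insert 0 0) (fun w => decide (w = 0))
      (fun w => by
        rw [PySem.Dict.getD_insert]
        by_cases h : w = 0
        · subst h
          rw [if_pos rfl, if_pos (by simp), pv_idx_zero HP]
        · rw [if_neg h, if_neg (by simp [h]), PySem.Dict.getD_empty])
      (fun w => by simp [PySem.Dict.mem_keys_insert, PySem.Dict.keys_empty])
      (PySem.Dict.nodup_keys_insert _ _ _ PySem.Dict.nodup_keys_empty)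
      (fun w hr hd => by
        have hw0 : w = 0 := pv_eq_zero_of_depth_zero hr (by omega)
        simp [hw0])
      (fun w hP => by
        have hw0 : w = 0 := of_decide_eq_true hP
        subst hw0; exact hg0)
    with ⟨hPOSr, hPOSn, hPOSk, hPOSnd⟩
  set POS := (pvLevList p 0).foldl (fun d lev => lev.foldl (fun d v =>
      ((PySem.List.pyGetD KD v []).foldl
        (fun dq c => (dq.1.insert c dq.2, dq.2 + PySem.List.pyGetD SZ c 0))
        (d, d.getD v 0 + 1)).1) d)
    ((PySem.Dict.empty : PySem.Dict Int Int).insert 0 0) with hPOS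
  -- ===== B's scatter pass reconstructs the tour =====
  have hitems2 : POS.items = POS.keys.map (fun w => (w, pvIdx p w)) := by
    rw [PySem.Dict.items_eq_map_keys POS hPOSnd 0]
    exact List.map_congr_left (fun w hw => by rw [hPOSr w ((hPOSk w).1 hw)])
  have hSZ0t : (PySem.List.pyGetD SZ 0 0).toNat = (pvTour p 0).length := by
    rw [hsz 0 (le_refl 0) hg0, pvSize]
    omega
  have hbounds : ∀ q ∈ POS.items,
      0 ≤ q.2 ∧ q.2 < ((List.replicate (PySem.List.pyGetD SZ 0 0).toNat (0 : Int)).length : Int) := by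
    intro q hq
    rw [hitems2] at hq
    rcases List.mem_map.1 hq with ⟨w, hw, rfl⟩
    have hr : pvReach p w := (hPOSk w).1 hw
    have hmem : w ∈ pvTour p 0 := (pv_mem_tour0_iff HP).2 hr
    rcases pv_idx_lt hmem with ⟨hl, hu⟩
    rw [List.length_replicate, hSZ0t]
    exact ⟨hl, hu⟩
  have hndidx : (POS.items.map (·.2)).Nodup := by
    rw [hitems2, List.map_map]
    refine (List.nodup_map_iff_inj_on hPOSnd).mpr ?_
    intro w1 h1 w2 h2 heq
    simp only [Function.comp_apply] at heq
    have hm1 : w1 ∈ pvTour p 0 := (pv_mem_tour0_iff HP).2 ((hPOSk w1).1 h1)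
    have hm2 : w2 ∈ pvTour p 0 := (pv_mem_tour0_iff HP).2 ((hPOSk w2).1 h2)
    rw [← pv_getElem_idx hm1, ← pv_getElem_idx hm2, heq]
  rcases pv_scatter POS.items (List.replicate (PySem.List.pyGetD SZ 0 0).toNat (0 : Int))
      hbounds hndidx with ⟨hOlen, hOset, hOun⟩
  have horder : POS.items.foldl (fun ord vi => PySem.List.pySetD ord vi.2 vi.1)
      (List.replicate (PySem.List.pyGetD SZ 0 0).toNat (0 : Int)) = pvTour p 0 := by
    apply pv_list_ext _ _ (by rw [hOlen, List.length_replicate, hSZ0t])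
    intro i hi
    by_cases hlt : i < ((pvTour p 0).length : Int)
    · have hin : i.toNat < (pvTour p 0).length := by omega
      have hw : (pvTour p 0)[i.toNat] ∈ pvTour p 0 := List.getElem_mem hin
      have hre : pvReach p ((pvTour p 0)[i.toNat]) := (pv_mem_tour0_iff HP).1 hw
      have hqmem : ((pvTour p 0)[i.toNat], pvIdx p ((pvTour p 0)[i.toNat])) ∈ POS.items := by
        rw [hitems2]
        exact List.mem_map.2 ⟨_, (hPOSk _).2 hre, rfl⟩
      have hidxi : pvIdx p ((pvTour p 0)[i.toNat]) = i := by
        rw [pv_idx_getElem HP hin]; omega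
      have hset := hOset _ hqmem
      simp only at hset
      rw [hidxi] at hset
      rw [hset, PySem.List.pyGetD_eq_getElem _ _ hi hlt]
    · have hge : ((pvTour p 0).length : Int) ≤ i := by omega
      rw [hOun i hi (fun q hq => by
          rcases hbounds q hq with ⟨_, hu⟩
          rw [List.length_replicate, hSZ0t] at hu
          omega),
        pv_getD_replicate, pv_getD_oob _ _ hge]
  rw [horder]
  -- ===== the dictionaries agree on every lookup =====
  set NTI := (PySem.List.enumerate (pvTour p 0) 0).foldl
    (fun d pr => d.insert pr.2 pr.1) (PySem.Dict.empty : PySem.Dict Int Int) with hNTI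
  have hdicts : ∀ x : Int, NTI.getD x 0 = POS.getD x 0 := by
    intro x
    rw [hNTI, pv_nti_getD HP x]
    by_cases hr : pvReach p x
    · rw [if_pos ((pv_mem_tour0_iff HP).2 hr), hPOSr x hr]
    · rw [if_neg (fun hm => hr ((pv_mem_tour0_iff HP).1 hm)), hPOSn x hr]
  -- ===== the query loops =====
  have hzq := pv_zip_fold
    (fun acc vi ki =>
      if ki ≤ PySem.List.pyGetD szA (vi - 1) 0 then
        acc ++ [PySem.List.pyGetD (pvTour p 0) (NTI.getD (vi - 1) 0 + ki - 1) 0 + 1]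
      else acc ++ [(-1 : Int)]) u k [] hlenuk
  simp only at hzq
  rw [hzq]
  rw [pv_foldl_congr (u.zip k) _
    (fun acc vk => acc ++ [if vk.2 ≤ PySem.List.pyGetD szA (vk.1 - 1) 0 then
        PySem.List.pyGetD (pvTour p 0) (NTI.getD (vk.1 - 1) 0 + vk.2 - 1) 0 + 1 else (-1 : Int)]) []
    (fun acc x _ => by dsimp only; split_ifs <;> rfl)]
  rw [pv_fold_map_toStr
    (fun vk => if vk.2 ≤ PySem.List.pyGetD szA (vk.1 - 1) 0 then
        PySem.List.pyGetD (pvTour p 0) (NTI.getD (vk.1 - 1) 0 + vk.2 - 1) 0 + 1 else (-1 : Int))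
    (u.zip k) []]
  rw [List.map_nil]
  congr 1
  apply pv_foldl_congr
  intro acc x _
  dsimp only
  rw [hAB, hdicts (x.1 - 1)]
  split_ifs <;> rfl

-- ===== VERDICT (by name: the statement is the Claim_ definition above) =====
theorem solve_spec : Claim_equal_solve := by
  intro p u k _ hpre
  show solve p u k = solve_alt p u k
  exact pv_main p u k hpre
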